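-- pv_equiv track=rewrite | github.com/vltanh/k-densest-neighborhood | scripts/classification/compare_bfs_bp_feasibility.py | edge_connectivity_at_least
-- ===== SOURCE A (Python) =====
-- from collections import defaultdict, deque
--
-- def edge_connectivity_at_least(nodes, undir_neighbors, kappa):
--     node_set = set(nodes)
--     if kappa <= 0:
--         return True
--     if len(node_set) <= 1:
--         return False
--     for source in node_set:
--         for target in node_set:
--             if source == target:
--                 continue
--             residual = {}
--             adj = defaultdict(list)
--             for u in node_set:
--                 for v in undir_neighbors.get(u, ()):
--                     if v not in node_set:
--                         continue
--                     residual[(u, v)] = residual.get((u, v), 0) + 1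
--                     if v not in adj[u]:
--                         adj[u].append(v)
--                     if u not in adj[v]:
--                         adj[v].append(u)
--
--             flow = 0
--             while flow < kappa:
--                 parent = {source: source}
--                 queue = deque([source])
--                 while queue and target not in parent:
--                     u = queue.popleft()
--                     for v in adj.get(u, ()):
--                         if v not in parent and residual.get((u, v), 0) > 0:
--                             parent[v] = u
--                             queue.append(v)
--                 if target not in parent:
--                     break
--                 v = target
--                 while v != source:
--                     u = parent[v]
--                     residual[(u, v)] -= 1
--                     residual[(v, u)] = residual.get((v, u), 0) + 1
--                     v = u
--                 flow += 1
--             if flow < kappa: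
--                 return False
--     return True
-- ===== SOURCE B (Python) =====
-- def _augment(adj, residual, visited, u, target):
--     # Recursive unit-capacity DFS: find an augmenting path and push one unit
--     # of flow along it while unwinding.  Returns True iff a path was found.
--     if u == target:
--         return True
--     visited.add(u)
--     for v in adj.get(u, ()):
--         if v not in visited and residual.get((u, v), 0) > 0:
--             if _augment(adj, residual, visited, v, target):
--                 residual[(u, v)] -= 1
--                 residual[(v, u)] = residual.get((v, u), 0) + 1
--                 return True
--     return False
--
--
-- def _capped_flow(adj, cap, source, target, kappa):
--     residual = dict(cap)
--     flow = 0
--     while flow < kappa and _augment(adj, residual, set(), source, target):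
--         flow += 1
--     return flow
--
--
-- def edge_connectivity_at_least(nodes, undir_neighbors, kappa):
--     # Fixed-source reduction: build the multigraph once, fix s = min(node_set),
--     # and check only the capped max-flows s->t and t->s for every other t
--     # (every cut separating some pair separates s from one side), using a
--     # recursive DFS max-flow instead of A's per-pair BFS rebuild.
--     node_set = set(nodes)
--     if kappa <= 0:
--         return True
--     if len(node_set) <= 1:
--         return False
--     cap = {}
--     adj = {}
--     for u in node_set:
--         for v in undir_neighbors.get(u, ()):
--             if v in node_set:
--                 cap[(u, v)] = cap.get((u, v), 0) + 1
--                 adj.setdefault(u, set()).add(v)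
--                 adj.setdefault(v, set()).add(u)
--     source = min(node_set)
--     for target in node_set:
--         if target != source:
--             if _capped_flow(adj, cap, source, target, kappa) < kappa:
--                 return False
--             if _capped_flow(adj, cap, target, source, kappa) < kappa:
--                 return False
--     return True
-- ===== Notes on version B (the rewrite author's own statement) =====
-- stated objective: alternative
-- what changed: B replaces A's all-pairs scheme (one capped BFS max-flow per ordered pair of nodes, with residual graph and adjacency rebuilt from scratch for every pair) by the fixed-source reduction: the multigraph is built once, a fixed source s = min(node_set) is chosen, and only the capped max-flows s->t and t->s are checked (any cut separating a pair separates s from one side), with the max-flow itself computed by a recursive unit-capacity DFS that augments on the unwind instead of A's BFS parent-map plus separate path-walk augmentation.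
import Mathlib
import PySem

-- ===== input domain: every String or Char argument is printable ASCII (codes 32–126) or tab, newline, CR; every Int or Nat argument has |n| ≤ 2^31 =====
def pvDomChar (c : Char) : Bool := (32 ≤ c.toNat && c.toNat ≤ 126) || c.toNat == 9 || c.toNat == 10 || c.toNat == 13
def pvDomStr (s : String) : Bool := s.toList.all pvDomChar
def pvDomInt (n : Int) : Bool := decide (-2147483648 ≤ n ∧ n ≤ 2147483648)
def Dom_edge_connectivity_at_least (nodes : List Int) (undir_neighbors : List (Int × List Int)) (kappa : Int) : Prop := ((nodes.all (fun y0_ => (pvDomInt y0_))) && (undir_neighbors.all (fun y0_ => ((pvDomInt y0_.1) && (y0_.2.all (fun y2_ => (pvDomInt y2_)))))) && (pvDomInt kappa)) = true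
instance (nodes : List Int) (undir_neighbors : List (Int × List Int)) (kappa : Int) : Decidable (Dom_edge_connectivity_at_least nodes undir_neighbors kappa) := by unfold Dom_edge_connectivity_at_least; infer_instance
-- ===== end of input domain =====

-- B replaces A's all-pairs max-flow scan (one capped BFS max-flow per ordered pair of
-- nodes, with the graph rebuilt for every pair) by the fixed-source reduction (the graph
-- is built once and only the capped flows s->t and t->s from one fixed node
-- s = min(node_set) are checked), with the max-flow computed by a recursive unit-capacity
-- DFS that augments on the unwind instead of A's BFS parent map plus a separate
-- augmentation walk; the equivalence proof is the min-cut characterisation of the capped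
-- augmenting-path flow. Python's set iteration order (not modelled) only feeds
-- order-independent consumptions here (conjunctions over all pairs; graph folds whose
-- final flow values are order-independent by the same characterisation).

-- ===== PORT A =====
-- inner neighbour scan of A's BFS loop ('for v in adj.get(u,()): if v not in parent and
-- residual.get((u,v),0) > 0: parent[v]=u; queue.append(v)')
def pvScan (adj : PySem.Dict Int (List Int)) (r : PySem.Dict (Int × Int) Int) (u : Int)
    (pq : PySem.Dict Int Int × List Int) : PySem.Dict Int Int × List Int :=
  (adj.getD u []).foldl
    (fun st v =>
      if ¬ st.1.contains v ∧ 0 < r.getD (u, v) 0 then (st.1.insert v u, st.2 ++ [v]) else st)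
    pq

-- 'if v not in adj[u]: adj[u].append(v)' on a defaultdict(list)
def pvAdjAddA (adj : PySem.Dict Int (List Int)) (k x : Int) : PySem.Dict Int (List Int) :=
  let l := adj.getD k []
  if x ∈ l then adj else adj.insert k (l ++ [x])

-- the residual/adj building double loop of A
def pvBuildA (S : List Int) (und : PySem.Dict Int (List Int)) :
    PySem.Dict (Int × Int) Int × PySem.Dict Int (List Int) :=
  S.foldl
    (fun st u =>
      (und.getD u []).foldl
        (fun st v =>
          if PySem.Set.contains S v then
            (st.1.insert (u, v) (st.1.getD (u, v) 0 + 1), pvAdjAddA (pvAdjAddA st.2 u v) v u)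
          else st)
        st)
    (PySem.Dict.empty, PySem.Dict.empty)

-- BFS of A (deque, popleft); fuel: each iteration pops one element and all pushes are the
-- initial one plus one per fresh parent key, so S.length + 2 iterations always suffice
def pvBfsA (adj : PySem.Dict Int (List Int)) (r : PySem.Dict (Int × Int) Int) (target : Int) :
    Nat → PySem.Dict Int Int → List Int → PySem.Dict Int Int
  | 0, parent, _ => parent
  | fuel + 1, parent, queue =>
    if parent.contains target then parent
    else
      match queue with
      | [] => parent
      | u :: rest =>
        let st := pvScan adj r u (parent, rest)
        pvBfsA adj r target fuel st.1 st.2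

-- 'v = target; while v != source: u = parent[v]; residual[(u,v)] -= 1; residual[(v,u)] = …'
-- fuel: the parent chain strictly descends the (unique) parent keys, so parent.size suffices
def pvAugA (parent : PySem.Dict Int Int) (source : Int) :
    Nat → Int → PySem.Dict (Int × Int) Int → PySem.Dict (Int × Int) Int
  | 0, _, r => r
  | fuel + 1, v, r =>
    if v = source then r
    else
      let u := parent.getD v v
      let r1 := r.insert (u, v) (r.getD (u, v) 0 - 1)
      pvAugA parent source fuel u (r1.insert (v, u) (r1.getD (v, u) 0 + 1))

-- 'flow = 0; while flow < kappa: …' — fuel kappa.toNat, flow increases by 1 per iteration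
def pvFlowA (adj : PySem.Dict Int (List Int)) (bnd : Nat) (source target : Int) :
    Nat → PySem.Dict (Int × Int) Int → Int → Int
  | 0, _, flow => flow
  | fuel + 1, r, flow =>
    let parent := pvBfsA adj r target bnd (PySem.Dict.empty.insert source source) [source]
    if parent.contains target then
      pvFlowA adj bnd source target fuel (pvAugA parent source parent.size target r) (flow + 1)
    else flow

def edge_connectivity_at_least (nodes : List Int) (undir_neighbors : List (Int × List Int)) (kappa : Int) : Bool :=
  let S := PySem.Set.ofList nodes
  if kappa ≤ 0 then true
  else if PySem.Set.len S ≤ 1 then false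
  else
    S.all fun source => S.all fun target =>
      if source == target then true
      else
        let g := pvBuildA S (PySem.Dict.mk undir_neighbors)
        if pvFlowA g.2 (S.length + 2) source target kappa.toNat g.1 0 < kappa then false
        else true

-- ===== PORT B =====
-- 'adj.setdefault(u, set()).add(v)' of Source B: ensure the key, then add to its set
def pvAdjSet (adj : PySem.Dict Int (List Int)) (k x : Int) : PySem.Dict Int (List Int) :=
  let d1 := adj.setdefault k []
  d1.insert k (PySem.Set.add (d1.getD k []) x)

-- the cap/adj building double loop of Source B
def pvBuildB (S : List Int) (und : PySem.Dict Int (List Int)) :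
    PySem.Dict (Int × Int) Int × PySem.Dict Int (List Int) :=
  S.foldl
    (fun st u =>
      (und.getD u []).foldl
        (fun st v =>
          if PySem.Set.contains S v then
            (st.1.insert (u, v) (st.1.getD (u, v) 0 + 1), pvAdjSet (pvAdjSet st.2 u v) v u)
          else st)
        st)
    (PySem.Dict.empty, PySem.Dict.empty)

-- the 'for v in adj.get(u, ())' loop of _augment with its early 'return True';
-- state = (found, residual, visited); once found the remaining iterations do nothing
def pvAugGo (rec : Int → PySem.Dict (Int × Int) Int → PySem.Set Int →
      Bool × PySem.Dict (Int × Int) Int × PySem.Set Int) (u : Int) :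
    List Int → Bool × PySem.Dict (Int × Int) Int × PySem.Set Int →
      Bool × PySem.Dict (Int × Int) Int × PySem.Set Int
  | [], st => st
  | v :: vs, st =>
    if ¬ st.1 ∧ ¬ PySem.Set.contains st.2.2 v ∧ 0 < st.2.1.getD (u, v) 0 then
      let res := rec v st.2.1 st.2.2
      if res.1 then
        let r1 := res.2.1.insert (u, v) (res.2.1.getD (u, v) 0 - 1)
        pvAugGo rec u vs (true, r1.insert (v, u) (r1.getD (v, u) 0 + 1), res.2.2)
      else pvAugGo rec u vs (false, res.2.1, res.2.2)
    else pvAugGo rec u vs st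

-- _augment of Source B: recursive unit-capacity DFS, augmenting while unwinding;
-- fuel bounds the recursion depth (visited grows at every level, so |S|+2 suffices)
def pvAug (adj : PySem.Dict Int (List Int)) (t : Int) :
    Nat → Int → PySem.Dict (Int × Int) Int → PySem.Set Int →
      Bool × PySem.Dict (Int × Int) Int × PySem.Set Int
  | 0 => fun _ r vis => (false, r, vis)
  | fuel + 1 => fun u r vis =>
    if u = t then (true, r, vis)
    else pvAugGo (pvAug adj t fuel) u (adj.getD u []) (false, r, PySem.Set.add vis u)

-- _capped_flow of Source B: 'while flow < kappa and _augment(...)' — fuel kappa.toNat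
def pvCapped (adj : PySem.Dict Int (List Int)) (bnd : Nat) (source target : Int) :
    Nat → PySem.Dict (Int × Int) Int → Int → Int
  | 0, _, flow => flow
  | fuel + 1, r, flow =>
    let res := pvAug adj target bnd source r PySem.Set.empty
    if res.1 then pvCapped adj bnd source target fuel res.2.1 (flow + 1) else flow

def edge_connectivity_at_least_alt (nodes : List Int) (undir_neighbors : List (Int × List Int)) (kappa : Int) : Bool :=
  let S := PySem.Set.ofList nodes
  if kappa ≤ 0 then true
  else if PySem.Set.len S ≤ 1 then false
  else
    let g := pvBuildB S (PySem.Dict.mk undir_neighbors)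
    let source := (PySem.List.min? S (fun x => x)).getD 0
    S.all fun target =>
      if target == source then true
      else if pvCapped g.2 (S.length + 2) source target kappa.toNat g.1 0 < kappa then false
      else if pvCapped g.2 (S.length + 2) target source kappa.toNat g.1 0 < kappa then false
      else true

-- ===== PRECONDITION & SPEC =====
def Spec_edge_connectivity_at_least (nodes : List Int) (undir_neighbors : List (Int × List Int)) (kappa : Int) (out : Bool) : Prop := out = edge_connectivity_at_least_alt nodes undir_neighbors kappa
instance (nodes : List Int) (undir_neighbors : List (Int × List Int)) (kappa : Int) (out : Bool) : Decidable (Spec_edge_connectivity_at_least nodes undir_neighbors kappa out) := by unfold Spec_edge_connectivity_at_least; infer_instance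

-- ===== CLAIM (what is proved, stated in full; the proofs are below) =====
def Claim_equal_edge_connectivity_at_least : Prop := ∀ (nodes : List Int) (undir_neighbors : List (Int × List Int)) (kappa : Int), Dom_edge_connectivity_at_least nodes undir_neighbors kappa → Spec_edge_connectivity_at_least nodes undir_neighbors kappa (edge_connectivity_at_least nodes undir_neighbors kappa)

-- ===== LEMMAS AND PROOFS =====

-- ---- abstractions used by the proofs: residual/adjacency dictionaries as functions ----
def pvFun (rD : PySem.Dict (Int × Int) Int) : Int × Int → Int := fun p => rD.getD p 0
def pvAdjF (adjD : PySem.Dict Int (List Int)) : Int → List Int := fun u => adjD.getD u []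

-- indicator of membership in a cut, crossing pairs, and the residual cut capacity Φ
def pvChi (R : Finset Int) (x : Int) : Int := if x ∈ R then 1 else 0
def pvCross (SS R : Finset Int) : Finset (Int × Int) :=
  (SS ×ˢ SS).filter (fun p => p.1 ∈ R ∧ p.2 ∉ R)
def pvPhi (SS R : Finset Int) (r : Int × Int → Int) : Int := ∑ p ∈ pvCross SS R, r p

-- residual invariant: nonnegative, and positive only along adjacency edges
def pvGood (adjL : Int → List Int) (r : Int × Int → Int) : Prop :=
  (∀ p, 0 ≤ r p) ∧ (∀ u v, 0 < r (u, v) → v ∈ adjL u)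

-- adjacency invariant: symmetric, and confined to SS
def pvAdjOK (SS : Finset Int) (adjL : Int → List Int) : Prop :=
  (∀ u v, v ∈ adjL u → u ∈ adjL v) ∧ (∀ u v, v ∈ adjL u → u ∈ SS ∧ v ∈ SS)

-- parent-map invariant (on the items list of A's parent dict): first entry (s,s);
-- keys unique; each later entry (v,u) points to an earlier key u along a positive
-- residual adjacency edge u→v
def pvPInv (adjL : Int → List Int) (r : Int × Int → Int) (s : Int) (l : List (Int × Int)) : Prop :=
  l.head? = some (s, s) ∧ (l.map Prod.fst).Nodup ∧
  ∀ i : Nat, (hi : i + 1 < l.length) →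
    (l[i+1].2 ∈ (l.take (i+1)).map Prod.fst ∧ 0 < r (l[i+1].2, l[i+1].1)
      ∧ l[i+1].1 ∈ adjL l[i+1].2 ∧ l[i+1].1 ≠ l[i+1].2)

-- chain step: u is v's parent, along a positive residual adjacency edge
def pvRel (π : PySem.Dict Int Int) (adjL : Int → List Int) (r : Int × Int → Int)
    (v u : Int) : Prop :=
  π.getD v v = u ∧ 0 < r (u, v) ∧ v ∈ adjL u ∧ u ≠ v

-- the functional effect of one augmentation step at child v with parent u
def pvUpd (r : Int × Int → Int) (u v : Int) : Int × Int → Int :=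
  Function.update (Function.update r (u, v) (r (u, v) - 1)) (v, u)
    ((Function.update r (u, v) (r (u, v) - 1)) (v, u) + 1)

-- augmenting along the whole chain L = [t, …, s] (child-to-parent order)
def pvApplyC (L : List Int) (r : Int × Int → Int) : Int × Int → Int :=
  (L.zip L.tail).foldl (fun r e => pvUpd r e.2 e.1) r

-- Source B's recursive DFS: postcondition of one _augment call started at u with visited vis.
-- On success the residual is the chain update along a simple path [t, …, u] of fresh
-- nodes; on failure the residual is untouched and visited has grown to a set containing
-- u, avoiding t, and closed under positive residual edges out of its fresh part.
def pvAugPost (adjD : PySem.Dict Int (List Int)) (SS : Finset Int) (t u : Int)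
    (rD : PySem.Dict (Int × Int) Int) (vis : PySem.Set Int)
    (res : Bool × PySem.Dict (Int × Int) Int × PySem.Set Int) : Prop :=
  (res.1 = true → ∃ L : List Int,
     L.head? = some t ∧ L.getLast? = some u ∧ L.Nodup ∧
     (∀ x ∈ L, x = t ∨ (x ∈ SS ∧ x ∉ vis)) ∧
     (∀ e ∈ L.zip L.tail, 0 < pvFun rD (e.2, e.1) ∧ e.1 ∈ pvAdjF adjD e.2) ∧
     pvFun res.2.1 = pvApplyC L (pvFun rD))
  ∧ (res.1 = false →
     res.2.1 = rD ∧
     (∀ x ∈ vis, x ∈ res.2.2) ∧ u ∈ res.2.2 ∧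
     (∀ x ∈ res.2.2, x ∈ vis ∨ (x ∈ SS ∧ x ≠ t)) ∧
     (∀ w ∈ res.2.2, w ∉ vis → ∀ v ∈ pvAdjF adjD w, 0 < pvFun rD (w, v) → v ∈ res.2.2))

lemma pvFun_insert (d : PySem.Dict (Int × Int) Int) (k : Int × Int) (x : Int) :
    pvFun (d.insert k x) = Function.update (pvFun d) k x := by
  funext p
  simp [pvFun, PySem.Dict.getD_insert, Function.update_apply]

lemma pvChain'_zip {α : Type} (Rl : α → α → Prop) :
    ∀ L : List α, L.IsChain Rl → ∀ e ∈ L.zip L.tail, Rl e.1 e.2 := by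
  intro L
  induction L with
  | nil => intro _ e he; simp at he
  | cons a l ih =>
    intro hch e he
    cases l with
    | nil => simp at he
    | cons b l' =>
      rw [List.isChain_cons_cons] at hch
      simp only [List.tail_cons, List.zip_cons_cons, List.mem_cons] at he
      rcases he with rfl | he
      · exact hch.1
      · exact ih hch.2 e he

lemma pvMem_zip_of_mem {α : Type} :
    ∀ (L : List α) (x : α), x ∈ L → 2 ≤ L.length →
      ∃ e ∈ L.zip L.tail, x = e.1 ∨ x = e.2 := by
  intro L
  induction L with
  | nil => intro x hx; simp at hx
  | cons a l ih =>
    intro x hx hlen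
    cases l with
    | nil => simp at hlen
    | cons b l' =>
      simp only [List.tail_cons, List.zip_cons_cons]
      rcases List.mem_cons.1 hx with rfl | hx'
      · exact ⟨(x, b), by simp⟩
      · cases l' with
        | nil =>
          rcases List.mem_cons.1 hx' with rfl | h
          · exact ⟨(a, x), by simp⟩
          · simp at h
        | cons c l'' =>
          obtain ⟨e, he, hxe⟩ := ih x hx' (by simp)
          exact ⟨e, List.mem_cons_of_mem _ he, hxe⟩

-- adjacent elements of a duplicate-free list are distinct
lemma pvNodup_chain_ne : ∀ (L : List Int), L.Nodup → L.IsChain (· ≠ ·) := by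
  intro L
  induction L with
  | nil => intro _; simp
  | cons a l ih =>
    intro h
    cases l with
    | nil => simp
    | cons b l' =>
      rw [List.isChain_cons_cons]
      exact ⟨fun e => (List.nodup_cons.1 h).1 (e ▸ List.mem_cons_self),
        ih (List.nodup_cons.1 h).2⟩

-- closed form of pvApplyC on a duplicate-free chain
lemma pvApplyC_eval :
    ∀ (L : List Int), L.Nodup → ∀ (r : Int × Int → Int) (p : Int × Int),
      pvApplyC L r p =
        r p - (if p ∈ (L.zip L.tail).map Prod.swap then 1 else 0)
            + (if p ∈ L.zip L.tail then 1 else 0) := by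
  intro L
  induction L with
  | nil => intro _ r p; simp [pvApplyC]
  | cons a l ih =>
    intro hN r p
    cases l with
    | nil => simp [pvApplyC]
    | cons b l' =>
      have hna : a ∉ b :: l' := (List.nodup_cons.1 hN).1
      have hab : a ≠ b := by intro h; exact hna (h ▸ List.mem_cons_self)
      have hal' : a ∉ l' := fun h => hna (List.mem_cons_of_mem _ h)
      have hstep : pvApplyC (a :: b :: l') r = pvApplyC (b :: l') (pvUpd r b a) := rfl
      simp only [List.tail_cons] at ih ⊢
      set zip' := (b :: l').zip l' with hz
      have nm1 : ((a, b) : Int × Int) ∉ zip' := fun h => hna (List.of_mem_zip h).1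
      have nm2 : ((b, a) : Int × Int) ∉ zip' := fun h => hal' (List.of_mem_zip h).2
      have nm3 : ((a, b) : Int × Int) ∉ zip'.map Prod.swap := by
        intro h
        obtain ⟨⟨x, y⟩, he, hpe⟩ := List.mem_map.1 h
        have hx : y = a ∧ x = b := by simpa [Prod.ext_iff] using hpe
        rw [hx.1, hx.2] at he
        exact nm2 he
      have nm4 : ((b, a) : Int × Int) ∉ zip'.map Prod.swap := by
        intro h
        obtain ⟨⟨x, y⟩, he, hpe⟩ := List.mem_map.1 h
        have hx : y = b ∧ x = a := by simpa [Prod.ext_iff] using hpe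
        rw [hx.1, hx.2] at he
        exact nm1 he
      have key : ∀ q, pvUpd r b a q =
          r q - (if q = ((b, a) : Int × Int) then 1 else 0) + (if q = ((a, b) : Int × Int) then 1 else 0) := by
        intro q
        have hne : ((a, b) : Int × Int) ≠ (b, a) := by
          intro h; exact hab (by cases h; rfl)
        unfold pvUpd
        rw [Function.update_apply, Function.update_apply, Function.update_apply]
        rw [if_neg hne]
        split_ifs <;> simp_all
      rw [hstep, ih (List.nodup_cons.1 hN).2 _ p, key p]
      simp only [← hz]
      have hzc : (a :: b :: l').zip (b :: l') = (a, b) :: zip' := rfl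
      simp only [hzc, List.map_cons, List.mem_cons, Prod.swap_prod_mk]
      have d1 : (if p = ((b, a) : Int × Int) ∨ p ∈ zip'.map Prod.swap then (1:Int) else 0)
          = (if p = ((b, a) : Int × Int) then 1 else 0) + (if p ∈ zip'.map Prod.swap then 1 else 0) := by
        by_cases h1 : p = (b, a)
        · subst h1; rw [if_pos (Or.inl rfl), if_pos rfl, if_neg nm4]; omega
        · simp only [or_iff_right h1]; rw [if_neg h1]; split_ifs <;> ring
      have d2 : (if p = ((a, b) : Int × Int) ∨ p ∈ zip' then (1:Int) else 0)
          = (if p = ((a, b) : Int × Int) then 1 else 0) + (if p ∈ zip' then 1 else 0) := by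
        by_cases h2 : p = (a, b)
        · subst h2; rw [if_pos (Or.inl rfl), if_pos rfl, if_neg nm1]; omega
        · simp only [or_iff_right h2]; rw [if_neg h2]; split_ifs <;> ring
      rw [d1, d2]
      ring

lemma pvPhi_update (SS R : Finset Int) (r : Int × Int → Int) (k : Int × Int) (x : Int) :
    pvPhi SS R (Function.update r k x) =
      pvPhi SS R r + (if k ∈ pvCross SS R then x - r k else 0) := by
  unfold pvPhi
  by_cases hk : k ∈ pvCross SS R
  · rw [if_pos hk, Finset.sum_update_of_mem hk]
    have h2 : ∑ x ∈ pvCross SS R \ {k}, r x = (∑ x ∈ pvCross SS R, r x) - r k := by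
      rw [Finset.sdiff_singleton_eq_erase]
      have := Finset.add_sum_erase (pvCross SS R) r hk
      linarith
    rw [h2]; ring
  · rw [if_neg hk, add_zero]
    refine Finset.sum_congr rfl (fun p hp => ?_)
    exact Function.update_of_ne (by rintro rfl; exact hk hp) _ _

lemma pvCross_mem_iff (SS R : Finset Int) (u v : Int) (hu : u ∈ SS) (hv : v ∈ SS) :
    ((u, v) ∈ pvCross SS R) ↔ (u ∈ R ∧ v ∉ R) := by
  simp [pvCross, hu, hv]

lemma pvPhi_upd (SS R : Finset Int) (r : Int × Int → Int) (u v : Int)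
    (hu : u ∈ SS) (hv : v ∈ SS) (hne : u ≠ v) :
    pvPhi SS R (pvUpd r u v) = pvPhi SS R r - pvChi R u + pvChi R v := by
  have hpair : ((v, u) : Int × Int) ≠ (u, v) := by
    intro h; exact hne (by cases h; rfl)
  unfold pvUpd
  rw [pvPhi_update, pvPhi_update, Function.update_of_ne hpair]
  simp only [pvCross_mem_iff _ _ _ _ hu hv, pvCross_mem_iff _ _ _ _ hv hu]
  have e1 : r (u, v) - 1 - r (u, v) = -1 := by ring
  have e2 : r (v, u) + 1 - r (v, u) = 1 := by ring
  rw [e1, e2]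
  unfold pvChi
  split_ifs <;> first | omega | tauto

-- telescoping: augmenting along a chain changes Φ by χ(head) − χ(last)
lemma pvPhi_applyC (SS R : Finset Int) :
    ∀ (L : List Int) (a lst : Int), L.head? = some a → L.getLast? = some lst →
      (∀ x ∈ L, x ∈ SS) → L.IsChain (· ≠ ·) → ∀ r,
      pvPhi SS R (pvApplyC L r) = pvPhi SS R r + pvChi R a - pvChi R lst := by
  intro L
  induction L with
  | nil => intro a lst h; simp at h
  | cons a' l ih =>
    intro a lst ha hlast hmem hch r
    have haa : a' = a := by simpa using ha
    subst haa
    cases l with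
    | nil =>
      have h' : a' = lst := by simpa using hlast
      subst h'
      show pvPhi SS R (pvApplyC [a'] r) = _
      simp only [pvApplyC, List.tail_cons, List.zip_nil_right, List.foldl_nil]
      ring
    | cons b rs =>
      have hstep : pvApplyC (a' :: b :: rs) r = pvApplyC (b :: rs) (pvUpd r b a') := rfl
      have hch' := (List.isChain_cons_cons.1 hch)
      have hlast' : (b :: rs).getLast? = some lst := by
        rwa [List.getLast?_cons_cons] at hlast
      have hmem' : ∀ x ∈ b :: rs, x ∈ SS := fun x hx => hmem x (List.mem_cons_of_mem _ hx)
      rw [hstep, ih b lst rfl hlast' hmem' hch'.2]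
      rw [pvPhi_upd SS R r b a' (hmem b (by simp)) (hmem a' (by simp)) (Ne.symm hch'.1)]
      ring

lemma pvGood_applyC (adjL : Int → List Int)
    (hsym : ∀ u v, v ∈ adjL u → u ∈ adjL v)
    (L : List Int) (r : Int × Int → Int) (hN : L.Nodup)
    (hrel : ∀ e ∈ L.zip L.tail, 0 < r (e.2, e.1) ∧ e.1 ∈ adjL e.2)
    (hG : pvGood adjL r) : pvGood adjL (pvApplyC L r) := by
  constructor
  · intro p
    rw [pvApplyC_eval L hN r p]
    by_cases h1 : p ∈ (L.zip L.tail).map Prod.swap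
    · obtain ⟨e, he, hpe⟩ := List.mem_map.1 h1
      have hre : 0 < r p := by
        have := (hrel e he).1
        rwa [show ((e.2, e.1) : Int × Int) = p from by cases hpe; rfl] at this
      split_ifs <;> omega
    · have := hG.1 p
      split_ifs <;> omega
  · intro u v hpos
    rw [pvApplyC_eval L hN r (u, v)] at hpos
    by_cases h2 : ((u, v) : Int × Int) ∈ L.zip L.tail
    · have := (hrel (u, v) h2).2
      exact hsym v u this
    · have h3 : 0 < r (u, v) := by split_ifs at hpos <;> omega
      exact hG.2 u v h3

-- extraction of the parent chain from a parent dict satisfying pvPInv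
lemma pvChain_exists (π : PySem.Dict Int Int) (adjL : Int → List Int)
    (r : Int × Int → Int) (s : Int) (h : pvPInv adjL r s π.items)
    (t : Int) (ht : t ∈ π.keys) :
    ∃ L : List Int, L.head? = some t ∧ L.getLast? = some s ∧ L.Nodup ∧
      L.IsChain (pvRel π adjL r) ∧ (∀ x ∈ L, x ∈ π.keys) := by
  obtain ⟨hhead, hnd, hstep⟩ := h
  have hkeys : π.keys = π.items.map Prod.fst := rfl
  have main : ∀ i, ∀ (hi : i < (π.items.map Prod.fst).length),
      ∃ L : List Int, L.head? = some ((π.items.map Prod.fst)[i]) ∧ L.getLast? = some s ∧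
        L.Nodup ∧ L.IsChain (pvRel π adjL r) ∧ (∀ x ∈ L, x ∈ π.keys) ∧
        (∀ x ∈ L, ∃ j, ∃ hj : j < (π.items.map Prod.fst).length, j ≤ i ∧
          (π.items.map Prod.fst)[j] = x) := by
    intro i
    induction i using Nat.strong_induction_on with
    | _ i IH =>
      intro hi
      match i, hi with
      | 0, hi =>
        have hlen0 : 0 < π.items.length := by simpa using hi
        have hk0 : (π.items.map Prod.fst)[0]'hi = s := by
          have h0 : π.items[0]'hlen0 = (s, s) := by
            have := List.head?_eq_some_iff.1 hhead
            obtain ⟨l', hl'⟩ := this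
            simp [hl']
          simp [h0]
        refine ⟨[s], by simp [hk0], by simp, by simp, by simp, ?_, ?_⟩
        · intro x hx
          have : x = s := by simpa using hx
          subst this
          rw [hkeys, ← hk0]
          exact List.getElem_mem _
        · intro x hx
          have : x = s := by simpa using hx
          subst this
          exact ⟨0, hi, le_refl _, hk0⟩
      | (i' + 1), hi =>
        have hil : i' + 1 < π.items.length := by simpa using hi
        obtain ⟨humem, hrpos, hadj, hne⟩ := hstep i' hil
        have hkv : (π.items.map Prod.fst)[i' + 1]'hi = (π.items[i' + 1]'hil).1 := by simp
        have hut : (π.items[i' + 1]'hil).2 ∈ (π.items.map Prod.fst).take (i' + 1) := by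
          rw [← List.map_take]
          exact humem
        obtain ⟨j, hjm, hju⟩ := List.mem_take_iff_getElem.1 hut
        have hj1 : j < i' + 1 := lt_of_lt_of_le hjm (min_le_left _ _)
        have hjlen : j < (π.items.map Prod.fst).length := lt_of_lt_of_le hjm (min_le_right _ _)
        have hkj : (π.items.map Prod.fst)[j]'hjlen = (π.items[i' + 1]'hil).2 := by
          rw [← hju]
        obtain ⟨L', hh', hlast', hnd', hch', hmem', hidx'⟩ := IH j hj1 hjlen
        rw [hkj] at hh'
        refine ⟨(π.items[i' + 1]'hil).1 :: L', by simp, ?_, ?_, ?_, ?_, ?_⟩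
        · cases L' with
          | nil => simp at hh'
          | cons c L'' => rw [List.getLast?_cons_cons]; exact hlast'
        · rw [List.nodup_cons]
          refine ⟨?_, hnd'⟩
          intro hvL
          obtain ⟨j', hj'len, hj'le, hkj'⟩ := hidx' _ hvL
          have hj'eq : j' = i' + 1 := by
            have heq := (hnd.getElem_inj_iff (hi := hj'len) (hj := hi))
            exact heq.1 (by rw [hkj', hkv])
          omega
        · cases L' with
          | nil => simp at hh'
          | cons c L'' =>
            have hcu : c = (π.items[i' + 1]'hil).2 := by simpa using hh'
            subst hcu
            rw [List.isChain_cons_cons]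
            refine ⟨⟨?_, hrpos, hadj, fun h => hne h.symm⟩, hch'⟩
            have hvu : ((π.items[i' + 1]'hil).1, (π.items[i' + 1]'hil).2) ∈ π.items := by
              rw [show ((π.items[i' + 1]'hil).1, (π.items[i' + 1]'hil).2) = π.items[i' + 1]'hil from rfl]
              exact List.getElem_mem _
            exact PySem.Dict.getD_of_mem_items π hvu hnd _
        · intro x hx
          rcases List.mem_cons.1 hx with rfl | hx'
          · rw [hkeys, ← hkv]
            exact List.getElem_mem _
          · exact hmem' x hx'
        · intro x hx
          rcases List.mem_cons.1 hx with rfl | hx'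
          · exact ⟨i' + 1, hi, le_refl _, hkv⟩
          · obtain ⟨j', hj'len, hj'le, hkj'⟩ := hidx' x hx'
            exact ⟨j', hj'len, by omega, hkj'⟩
  have htks : t ∈ π.items.map Prod.fst := by rw [← hkeys]; exact ht
  obtain ⟨i, hi, hit⟩ := List.mem_iff_getElem.1 htks
  obtain ⟨L, hh, hlast, hnd', hch, hmem, _⟩ := main i hi
  exact ⟨L, by rw [hit] at hh; exact hh, hlast, hnd', hch, hmem⟩

-- the functional effect of one residual double-update of the ports
lemma pvFun_step (rD : PySem.Dict (Int × Int) Int) (u v : Int) :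
    pvFun ((rD.insert (u, v) (rD.getD (u, v) 0 - 1)).insert (v, u)
      ((rD.insert (u, v) (rD.getD (u, v) 0 - 1)).getD (v, u) 0 + 1)) = pvUpd (pvFun rD) u v := by
  funext p
  simp only [pvFun, pvUpd, PySem.Dict.getD_insert, Function.update_apply]

-- A's augmentation walk follows the chain
lemma pvAugA_eq_applyC (π : PySem.Dict Int Int) (s : Int) :
    ∀ (L : List Int) (fuel : Nat) (v : Int) (rD : PySem.Dict (Int × Int) Int),
      L.head? = some v → L.getLast? = some s → L.Nodup →
      L.IsChain (fun a b => π.getD a a = b) → L.length ≤ fuel + 1 →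
      pvFun (pvAugA π s fuel v rD) = pvApplyC L (pvFun rD) := by
  intro L
  induction L with
  | nil => intro fuel v rD hh; simp at hh
  | cons a l ih =>
    intro fuel v rD hh hlast hnd hch hlen
    have hav : a = v := by simpa using hh
    subst hav
    cases l with
    | nil =>
      have has : a = s := by simpa using hlast
      subst has
      cases fuel with
      | zero => rfl
      | succ f => show pvFun (if a = a then rD else _) = _; rw [if_pos rfl]; rfl
    | cons b rest =>
      have hlast' : (b :: rest).getLast? = some s := by rwa [List.getLast?_cons_cons] at hlast
      have hsmem : s ∈ b :: rest := by
        obtain ⟨ys, hys⟩ := List.getLast?_eq_some_iff.1 hlast'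
        rw [hys]; simp
      have hnas : a ≠ s := fun h => (List.nodup_cons.1 hnd).1 (h ▸ hsmem)
      have hrel := (List.isChain_cons_cons.1 hch).1
      cases fuel with
      | zero => simp at hlen
      | succ f =>
        show pvFun (if a = s then rD else _) = _
        rw [if_neg hnas]
        rw [hrel]
        have heq : pvApplyC (a :: b :: rest) (pvFun rD) = pvApplyC (b :: rest) (pvUpd (pvFun rD) b a) := rfl
        rw [heq, ← pvFun_step rD b a]
        exact ih f b _ rfl hlast' (List.nodup_cons.1 hnd).2 (List.isChain_cons_cons.1 hch).2
          (by simp at hlen ⊢; omega)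

-- zip of a chain extended by one element
lemma pvZip_append_one :
    ∀ (L : List Int) (v u : Int), L.getLast? = some v →
      (L ++ [u]).zip (L ++ [u]).tail = L.zip L.tail ++ [(v, u)] := by
  intro L
  induction L with
  | nil => intro v u h; simp at h
  | cons a l ih =>
    intro v u h
    cases l with
    | nil =>
      have hav : a = v := by simpa using h
      subst hav
      simp
    | cons b l' =>
      have h' : (b :: l').getLast? = some v := by rwa [List.getLast?_cons_cons] at h
      have := ih v u h'
      simp only [List.cons_append, List.tail_cons, List.zip_cons_cons] at this ⊢
      rw [this]

lemma pvApplyC_append_one (L : List Int) (v u : Int) (h : L.getLast? = some v)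
    (r : Int × Int → Int) :
    pvApplyC (L ++ [u]) r = pvUpd (pvApplyC L r) u v := by
  unfold pvApplyC
  rw [pvZip_append_one L v u h, List.foldl_append]
  rfl

-- appending a fresh child entry preserves the parent-map invariant
lemma pvPInv_append (adjL : Int → List Int) (r : Int × Int → Int) (s : Int)
    (l : List (Int × Int)) (v u : Int)
    (h : pvPInv adjL r s l) (hu : u ∈ l.map Prod.fst) (hv : v ∉ l.map Prod.fst)
    (hr : 0 < r (u, v)) (hadj : v ∈ adjL u) :
    pvPInv adjL r s (l ++ [(v, u)]) := by
  obtain ⟨hh, hnd, hst⟩ := h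
  have hne : v ≠ u := fun e => hv (e ▸ hu)
  refine ⟨?_, ?_, ?_⟩
  · cases l with
    | nil => simp at hh
    | cons e l' => simpa using hh
  · rw [List.map_append]
    simp only [List.nodup_append, List.map_cons, List.map_nil]
    refine ⟨hnd, by simp, ?_⟩
    intro a ha b hbv
    have hb := List.mem_singleton.1 hbv
    subst hb
    exact fun e => hv (e ▸ ha)
  · intro i hi
    rw [List.length_append, List.length_cons, List.length_nil] at hi
    by_cases hlt : i + 1 < l.length
    · have hg : (l ++ [(v, u)])[i+1]'(by simp; omega) = l[i+1]'hlt :=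
        List.getElem_append_left _
      have htk : (l ++ [(v, u)]).take (i+1) = l.take (i+1) :=
        List.take_append_of_le_length (by omega)
      rw [hg, htk]
      exact hst i hlt
    · have hieq : i + 1 = l.length := by omega
      have hg : (l ++ [(v, u)])[i+1]'(by simp; omega) = (v, u) := by
        rw [List.getElem_append_right (by omega)]
        simp [hieq]
      have htk : (l ++ [(v, u)]).take (i+1) = l := by
        rw [hieq, List.take_left]
      rw [hg, htk]
      exact ⟨hu, hr, hadj, hne⟩

-- A's inner neighbour scan: grows the parent map by fresh children of u, keeps the
-- invariant, and leaves u fully processed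
lemma pvScan_spec (adjD : PySem.Dict Int (List Int)) (rD : PySem.Dict (Int × Int) Int)
    (s u : Int) :
    ∀ (ns : List Int) (π : PySem.Dict Int Int) (q : List Int),
      (∀ v ∈ ns, v ∈ adjD.getD u []) → u ∈ π.keys →
      pvPInv (pvAdjF adjD) (pvFun rD) s π.items →
      ∃ Δ : List (Int × Int),
        ((ns.foldl (fun st v =>
            if ¬ st.1.contains v ∧ 0 < rD.getD (u, v) 0 then (st.1.insert v u, st.2 ++ [v]) else st)
            (π, q)).1.items = π.items ++ Δ) ∧
        ((ns.foldl (fun st v =>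
            if ¬ st.1.contains v ∧ 0 < rD.getD (u, v) 0 then (st.1.insert v u, st.2 ++ [v]) else st)
            (π, q)).2 = q ++ Δ.map Prod.fst) ∧
        (∀ e ∈ Δ, e.2 = u ∧ e.1 ∈ adjD.getD u []) ∧
        pvPInv (pvAdjF adjD) (pvFun rD) s (π.items ++ Δ) ∧
        (∀ v ∈ ns, 0 < rD.getD (u, v) 0 →
          v ∈ (π.items ++ Δ).map Prod.fst) := by
  intro ns
  induction ns with
  | nil =>
    intro π q _ _ hPInv
    exact ⟨[], by simp, by simp, by simp, by simpa using hPInv, by simp⟩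
  | cons v vs ih =>
    intro π q hns hu hPInv
    simp only [List.foldl_cons]
    by_cases hc : ¬ π.contains v ∧ 0 < rD.getD (u, v) 0
    · rw [show (if ¬ (π, q).1.contains v ∧ 0 < rD.getD (u, v) 0
          then ((π, q).1.insert v u, (π, q).2 ++ [v]) else (π, q)) = (π.insert v u, q ++ [v])
          from by rw [if_pos hc]]
      have hcont : π.contains v = false := by simpa using hc.1
      have hitems : (π.insert v u).items = π.items ++ [(v, u)] :=
        PySem.Dict.items_insert_of_not_contains _ _ hcont
      have hvnk : v ∉ π.items.map Prod.fst := by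
        intro hvk
        have hvc : π.contains v = true := (PySem.Dict.contains_iff_mem_keys _ _).2 hvk
        rw [hvc] at hcont
        exact absurd hcont (by simp)
      have hPInv' : pvPInv (pvAdjF adjD) (pvFun rD) s (π.insert v u).items := by
        rw [hitems]
        exact pvPInv_append _ _ _ _ _ _ hPInv hu hvnk hc.2 (hns v List.mem_cons_self)
      have hu' : u ∈ (π.insert v u).keys := by
        show u ∈ (π.insert v u).items.map Prod.fst
        rw [hitems, List.map_append]
        exact List.mem_append_left _ hu
      obtain ⟨Δ', h1, h2, h3, h4, h5⟩ :=
        ih (π.insert v u) (q ++ [v]) (fun w hw => hns w (List.mem_cons_of_mem _ hw)) hu' hPInv'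
      refine ⟨(v, u) :: Δ', ?_, ?_, ?_, ?_, ?_⟩
      · rw [h1, hitems]; simp
      · rw [h2]; simp
      · intro e he
        rcases List.mem_cons.1 he with rfl | he'
        · exact ⟨rfl, hns v List.mem_cons_self⟩
        · exact h3 e he'
      · have := h4
        rw [hitems] at this
        simpa [List.append_assoc] using this
      · intro w hw hrw
        rcases List.mem_cons.1 hw with rfl | hw'
        · simp
        · have := h5 w hw' hrw
          rw [hitems] at this
          simpa [List.append_assoc] using this
    · rw [show (if ¬ (π, q).1.contains v ∧ 0 < rD.getD (u, v) 0
          then ((π, q).1.insert v u, (π, q).2 ++ [v]) else (π, q)) = (π, q)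
          from by rw [if_neg hc]]
      obtain ⟨Δ, h1, h2, h3, h4, h5⟩ :=
        ih π q (fun w hw => hns w (List.mem_cons_of_mem _ hw)) hu hPInv
      refine ⟨Δ, h1, h2, h3, h4, ?_⟩
      intro w hw hrw
      rcases List.mem_cons.1 hw with rfl | hw'
      · -- v was already present
        have hcv : π.contains w = true := by
          by_contra hfalse
          exact hc ⟨by simp [Bool.not_eq_true] at hfalse ⊢; simp [hfalse], hrw⟩
        have : w ∈ π.keys := (PySem.Dict.contains_iff_mem_keys _ _).1 hcv
        rw [List.map_append]
        exact List.mem_append_left _ this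
      · exact h5 w hw' hrw

-- size bound for a parent map confined to {s} ∪ SS
lemma pvKeys_len_le (SS : Finset Int) (s : Int) (ks : List Int) (hnd : ks.Nodup)
    (hsub : ∀ k ∈ ks, k = s ∨ k ∈ SS) : ks.length ≤ SS.card + 1 := by
  have h1 : ks.toFinset ⊆ insert s SS := by
    intro k hk
    rcases hsub k (List.mem_toFinset.1 hk) with rfl | h
    · exact Finset.mem_insert_self _ _
    · exact Finset.mem_insert_of_mem h
  calc ks.length = ks.toFinset.card := (List.toFinset_card_of_nodup hnd).symm
    _ ≤ (insert s SS).card := Finset.card_le_card h1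
    _ ≤ SS.card + 1 := Finset.card_insert_le _ _

-- search-loop specification of A's BFS
lemma pvBfsA_spec (adjD : PySem.Dict Int (List Int)) (rD : PySem.Dict (Int × Int) Int)
    (SS : Finset Int) (s t : Int)
    (hadj : ∀ u v, v ∈ adjD.getD u [] → u ∈ SS ∧ v ∈ SS) :
    ∀ (fuel : Nat) (π : PySem.Dict Int Int) (q : List Int),
      pvPInv (pvAdjF adjD) (pvFun rD) s π.items →
      (∀ x ∈ q, x ∈ π.keys) →
      (∀ u ∈ π.keys, u ∉ q → ∀ v ∈ adjD.getD u [], 0 < rD.getD (u, v) 0 → v ∈ π.keys) →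
      (∀ k ∈ π.keys, k = s ∨ k ∈ SS) →
      (q.length + (SS.card + 2 - π.items.length) ≤ fuel + 1) →
      pvPInv (pvAdjF adjD) (pvFun rD) s (pvBfsA adjD rD t fuel π q).items ∧
      (∀ k ∈ (pvBfsA adjD rD t fuel π q).keys, k = s ∨ k ∈ SS) ∧
      ((pvBfsA adjD rD t fuel π q).contains t = false →
        ∀ u ∈ (pvBfsA adjD rD t fuel π q).keys, ∀ v ∈ adjD.getD u [],
          0 < rD.getD (u, v) 0 → v ∈ (pvBfsA adjD rD t fuel π q).keys) := by
  intro fuel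
  induction fuel with
  | zero =>
    intro π q hPInv hq hproc hsub hm
    have hnlen : π.items.length ≤ SS.card + 1 := by
      have h1 : π.keys.length ≤ SS.card + 1 := pvKeys_len_le SS s _ hPInv.2.1 hsub
      have h2 : π.keys.length = π.items.length := List.length_map ..
      omega
    have hq0 : q = [] := by
      have : q.length = 0 := by omega
      exact List.eq_nil_of_length_eq_zero this
    subst hq0
    exact ⟨hPInv, hsub, fun _ u hu v hv hr => hproc u hu (by simp) v hv hr⟩
  | succ fuel ih =>
    intro π q hPInv hq hproc hsub hm
    by_cases hct : π.contains t = true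
    · have hunf : pvBfsA adjD rD t (fuel + 1) π q = π := by
        rw [pvBfsA.eq_def]; simp [hct]
      rw [hunf]
      exact ⟨hPInv, hsub, fun hfalse => absurd hct (by rw [hfalse]; simp)⟩
    · rw [Bool.not_eq_true] at hct
      cases q with
      | nil =>
        have hunf : pvBfsA adjD rD t (fuel + 1) π [] = π := by
          rw [pvBfsA.eq_def]; simp [hct]
        rw [hunf]
        exact ⟨hPInv, hsub, fun _ u hu v hv hr => hproc u hu (by simp) v hv hr⟩
      | cons u rest =>
        have hu : u ∈ π.keys := hq u List.mem_cons_self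
        obtain ⟨Δ, h1, h2, h3, h4, h5⟩ :=
          pvScan_spec adjD rD s u (adjD.getD u []) π rest (fun _ h => h) hu hPInv
        have hunf : pvBfsA adjD rD t (fuel + 1) π (u :: rest) =
            pvBfsA adjD rD t fuel (pvScan adjD rD u (π, rest)).1 (pvScan adjD rD u (π, rest)).2 := by
          rw [pvBfsA.eq_def]; simp [hct]
        rw [hunf]
        set st := pvScan adjD rD u (π, rest) with hstdef
        have hsc1 : st.1.items = π.items ++ Δ := h1
        have hsc2 : st.2 = rest ++ Δ.map Prod.fst := h2
        have hkeys' : st.1.keys = π.keys ++ Δ.map Prod.fst := by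
          show st.1.items.map Prod.fst = _
          rw [hsc1, List.map_append]
          rfl
        have hPInv' : pvPInv (pvAdjF adjD) (pvFun rD) s st.1.items := by
          rw [hsc1]; exact h4
        have hsub' : ∀ k ∈ st.1.keys, k = s ∨ k ∈ SS := by
          intro k hk
          rw [hkeys'] at hk
          rcases List.mem_append.1 hk with hk' | hk'
          · exact hsub k hk'
          · obtain ⟨e, he, hke⟩ := List.mem_map.1 hk'
            exact Or.inr (hke ▸ (hadj u e.1 (h3 e he).2).2)
        have hq' : ∀ x ∈ st.2, x ∈ st.1.keys := by
          intro x hx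
          rw [hsc2] at hx
          rw [hkeys']
          rcases List.mem_append.1 hx with hx' | hx'
          · exact List.mem_append_left _ (hq x (List.mem_cons_of_mem _ hx'))
          · exact List.mem_append_right _ hx'
        have hproc' : ∀ w ∈ st.1.keys, w ∉ st.2 →
            ∀ v ∈ adjD.getD w [], 0 < rD.getD (w, v) 0 → v ∈ st.1.keys := by
          intro w hw hwn v hv hr
          rw [hsc2] at hwn
          rw [hkeys'] at hw ⊢
          rcases List.mem_append.1 hw with hw' | hw'
          · by_cases hwu : w = u
            · subst hwu
              have h5' := h5 v hv hr
              rw [List.map_append] at h5'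
              exact h5'
            · have hwq : w ∉ u :: rest := by
                intro hmem
                rcases List.mem_cons.1 hmem with h | h
                · exact hwu h
                · exact hwn (List.mem_append_left _ h)
              exact List.mem_append_left _ (hproc w hw' hwq v hv hr)
          · exact absurd (List.mem_append_right rest hw') hwn
        have hlen' : st.1.items.length = π.items.length + Δ.length := by
          rw [hsc1, List.length_append]
        have hn'le : st.1.items.length ≤ SS.card + 1 := by
          have hndk : st.1.keys.Nodup := by
            have hkk : st.1.keys = st.1.items.map Prod.fst := rfl
            rw [hkk, hsc1]
            exact h4.2.1
          have hk1 : st.1.keys.length ≤ SS.card + 1 := pvKeys_len_le SS s _ hndk hsub'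
          have hk2 : st.1.keys.length = st.1.items.length := List.length_map ..
          omega
        have hm' : st.2.length + (SS.card + 2 - st.1.items.length) ≤ fuel + 1 := by
          have e2 : st.2.length = rest.length + Δ.length := by rw [hsc2]; simp
          have e3 : (u :: rest).length = rest.length + 1 := by simp
          rw [e3] at hm
          omega
        exact ih st.1 st.2 hPInv' hq' hproc' hsub' hm'

lemma pvPhi_nonneg (SS R : Finset Int) (r : Int × Int → Int) (h : ∀ p, 0 ≤ r p) :
    0 ≤ pvPhi SS R r := Finset.sum_nonneg fun p _ => h p

lemma pvLen_le_of_nodup_subset (L ks : List Int) (hnd : L.Nodup) (hsub : ∀ x ∈ L, x ∈ ks) :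
    L.length ≤ ks.length := by
  calc L.length = L.toFinset.card := (List.toFinset_card_of_nodup hnd).symm
    _ ≤ ks.toFinset.card := Finset.card_le_card (by
        intro x hx
        exact List.mem_toFinset.2 (hsub x (List.mem_toFinset.1 hx)))
    _ ≤ ks.length := List.toFinset_card_le _

-- flow-loop specification, port A: the result counts augmentations; it is bounded by every
-- cut capacity, and on early exit it equals the capacity of some cut
lemma pvFlowA_spec (adjD : PySem.Dict Int (List Int)) (SS : Finset Int) (bnd : Nat)
    (s t : Int) (hadjOK : pvAdjOK SS (pvAdjF adjD)) (hst : s ≠ t)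
    (hbnd : SS.card + 1 ≤ bnd) :
    ∀ (fuel : Nat) (rD : PySem.Dict (Int × Int) Int) (flow : Int),
      pvGood (pvAdjF adjD) (pvFun rD) →
      ∃ k : Nat, pvFlowA adjD bnd s t fuel rD flow = flow + k ∧
        (k = fuel ∨ ∃ R : Finset Int, s ∈ R ∧ t ∉ R ∧ (k : Int) = pvPhi SS R (pvFun rD)) ∧
        (∀ R : Finset Int, s ∈ R → t ∉ R → (k : Int) ≤ pvPhi SS R (pvFun rD)) := by
  intro fuel
  induction fuel with
  | zero =>
    intro rD flow hG
    exact ⟨0, by simp [pvFlowA], Or.inl rfl,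
      fun R _ _ => by simpa using pvPhi_nonneg SS R _ hG.1⟩
  | succ fuel ih =>
    intro rD flow hG
    -- initial search state
    have hitems0 : (PySem.Dict.empty.insert s s).items = [(s, s)] := by
      rw [PySem.Dict.items_insert_of_not_contains _ _ (by simp)]
      rfl
    have hPInv0 : pvPInv (pvAdjF adjD) (pvFun rD) s (PySem.Dict.empty.insert s s).items := by
      rw [hitems0]
      exact ⟨by simp, by simp, fun i hi => by simp at hi⟩
    have hkeys0 : (PySem.Dict.empty.insert s s).keys = [s] := by
      show (PySem.Dict.empty.insert s s).items.map Prod.fst = [s]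
      rw [hitems0]; simp
    obtain ⟨hPInvf, hsubf, hclosef⟩ :=
      pvBfsA_spec adjD rD SS s t hadjOK.2 bnd (PySem.Dict.empty.insert s s) [s]
        hPInv0
        (by intro x hx; rw [hkeys0]; simpa using hx)
        (by intro u hu hnu; rw [hkeys0] at hu; simp at hu; subst hu; simp at hnu)
        (by intro k hk; rw [hkeys0] at hk; simp at hk; exact Or.inl hk)
        (by rw [hitems0]; simp; omega)
    set π := pvBfsA adjD rD t bnd (PySem.Dict.empty.insert s s) [s] with hπ
    by_cases hfound : π.contains t = true
    · -- augmenting path found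
      have hstep : pvFlowA adjD bnd s t (fuel + 1) rD flow =
          pvFlowA adjD bnd s t fuel (pvAugA π s π.size t rD) (flow + 1) := by
        rw [pvFlowA.eq_def]
        simp only [← hπ, hfound, if_true]
      have htk : t ∈ π.keys := (PySem.Dict.contains_iff_mem_keys _ _).1 hfound
      obtain ⟨L, hh, hlast, hnd, hch, hmem⟩ :=
        pvChain_exists π (pvAdjF adjD) (pvFun rD) s hPInvf t htk
      have hchain' : L.IsChain (fun a b => π.getD a a = b) := hch.imp (by intro a b h; exact h.1)
      have hrel : ∀ e ∈ L.zip L.tail, 0 < (pvFun rD) (e.2, e.1) ∧ e.1 ∈ pvAdjF adjD e.2 :=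
        fun e he => ⟨(pvChain'_zip _ L hch e he).2.1, (pvChain'_zip _ L hch e he).2.2.1⟩
      have hlenL : L.length ≤ π.size + 1 := by
        have := pvLen_le_of_nodup_subset L π.keys hnd hmem
        have hkl : π.keys.length = π.items.length := List.length_map ..
        show L.length ≤ π.items.length + 1
        omega
      have hbr : pvFun (pvAugA π s π.size t rD) = pvApplyC L (pvFun rD) :=
        pvAugA_eq_applyC π s L π.size t rD hh hlast hnd hchain' hlenL
      have hG' : pvGood (pvAdjF adjD) (pvFun (pvAugA π s π.size t rD)) := by
        rw [hbr]
        exact pvGood_applyC _ hadjOK.1 L _ hnd hrel hG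
      have hlen2 : 2 ≤ L.length := by
        cases L with
        | nil => simp at hh
        | cons a l =>
          cases l with
          | nil =>
            exfalso
            have ha : a = t := by simpa using hh
            have ha2 : a = s := by simpa using hlast
            exact hst (ha2 ▸ ha ▸ rfl)
          | cons b l' => simp
      have hmemSS : ∀ x ∈ L, x ∈ SS := by
        intro x hx
        obtain ⟨e, he, hxe⟩ := pvMem_zip_of_mem L x hx hlen2
        have hs' := hadjOK.2 e.2 e.1 (hrel e he).2
        rcases hxe with rfl | rfl
        · exact hs'.2
        · exact hs'.1
      have hchNe : L.IsChain (· ≠ ·) := hch.imp (by intro a b h; exact h.2.2.2.symm)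
      have hphiL : ∀ R : Finset Int, s ∈ R → t ∉ R →
          pvPhi SS R (pvApplyC L (pvFun rD)) = pvPhi SS R (pvFun rD) - 1 := by
        intro R hsR htR
        rw [pvPhi_applyC SS R L t s hh hlast hmemSS hchNe (pvFun rD)]
        unfold pvChi
        rw [if_neg htR, if_pos hsR]
        ring
      obtain ⟨k', hres', hdisj', hbound'⟩ := ih (pvAugA π s π.size t rD) (flow + 1) hG'
      refine ⟨k' + 1, ?_, ?_, ?_⟩
      · rw [hstep, hres']
        push_cast
        ring
      · rcases hdisj' with hk | ⟨R, hsR, htR, hphi⟩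
        · exact Or.inl (by omega)
        · refine Or.inr ⟨R, hsR, htR, ?_⟩
          rw [hbr, hphiL R hsR htR] at hphi
          push_cast
          omega
      · intro R hsR htR
        have := hbound' R hsR htR
        rw [hbr, hphiL R hsR htR] at this
        push_cast
        omega
    · -- no augmenting path: the reached keys form a saturated cut
      have hstep : pvFlowA adjD bnd s t (fuel + 1) rD flow = flow := by
        rw [pvFlowA.eq_def]
        simp only [← hπ, hfound, if_false, Bool.false_eq_true]
      have hfound' : π.contains t = false := by simpa using hfound
      have hclose := hclosef hfound'
      have hsR : s ∈ π.keys.toFinset := by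
        obtain ⟨l', hl'⟩ := List.head?_eq_some_iff.1 hPInvf.1
        rw [List.mem_toFinset]
        show s ∈ π.items.map Prod.fst
        rw [hl']
        simp
      have htR : t ∉ π.keys.toFinset := by
        rw [List.mem_toFinset]
        intro hmem
        rw [← PySem.Dict.contains_iff_mem_keys] at hmem
        rw [hmem] at hfound'
        exact absurd hfound' (by simp)
      have hphi0 : pvPhi SS (π.keys.toFinset) (pvFun rD) = 0 := by
        apply Finset.sum_eq_zero
        intro p hp
        simp only [pvCross, Finset.mem_filter] at hp
        obtain ⟨_, hpR, hpNR⟩ := hp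
        by_contra hne
        have hpos : 0 < pvFun rD p := lt_of_le_of_ne (hG.1 p) (Ne.symm hne)
        have hadj' : p.2 ∈ pvAdjF adjD p.1 := hG.2 p.1 p.2 (by
          rw [show ((p.1, p.2) : Int × Int) = p from rfl]
          exact hpos)
        have : p.2 ∈ π.keys := hclose p.1 (List.mem_toFinset.1 hpR) p.2 hadj' (by
          show 0 < rD.getD (p.1, p.2) 0
          rw [show ((p.1, p.2) : Int × Int) = p from rfl]
          exact hpos)
        exact hpNR (List.mem_toFinset.2 this)
      refine ⟨0, by rw [hstep]; simp, Or.inr ⟨π.keys.toFinset, hsR, htR, by rw [hphi0]; simp⟩,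
        fun R _ _ => by simpa using pvPhi_nonneg SS R _ hG.1⟩

-- ---- B-side lemmas: the recursive DFS augmenter ----

-- pvAugGo leaves a found state untouched
lemma pvAugGo_of_found (rec : Int → PySem.Dict (Int × Int) Int → PySem.Set Int →
      Bool × PySem.Dict (Int × Int) Int × PySem.Set Int) (u : Int) :
    ∀ (l : List Int) (st : Bool × PySem.Dict (Int × Int) Int × PySem.Set Int),
      st.1 = true → pvAugGo rec u l st = st := by
  intro l
  induction l with
  | nil => intro st _; rfl
  | cons v vs ih =>
    intro st hst
    show (if ¬ st.1 ∧ _ ∧ _ then _ else pvAugGo rec u vs st) = st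
    rw [if_neg (by rw [hst]; simp), ih st hst]

-- specification of Source B's neighbour loop: from an unfound state (false, rD, visc) it
-- either finds a fresh simple path ending in u and applies the chain update on top of
-- rD, or leaves the residual alone and grows visited into a closed set covering every
-- positive neighbour of u
lemma pvAugGo_spec (adjD : PySem.Dict Int (List Int)) (SS : Finset Int) (t u : Int)
    (rD : PySem.Dict (Int × Int) Int) (vis : PySem.Set Int) (fb : Nat)
    (rec : Int → PySem.Dict (Int × Int) Int → PySem.Set Int →
      Bool × PySem.Dict (Int × Int) Int × PySem.Set Int)
    (hadj : ∀ a b, b ∈ pvAdjF adjD a → a ∈ SS ∧ b ∈ SS)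
    (hu : u ∈ SS) (hut : u ≠ t) (htv : t ∉ vis) (hvSS : ∀ x ∈ vis, x ∈ SS)
    (hrec : ∀ (v : Int) (visc : PySem.Set Int),
      (v = t ∨ v ∈ SS) → v ∉ visc → t ∉ visc → (∀ x ∈ visc, x ∈ SS) →
      SS.card + 1 ≤ fb + visc.toFinset.card →
      pvAugPost adjD SS t v rD visc (rec v rD visc)) :
    ∀ (ns : List Int), (∀ v ∈ ns, v ∈ pvAdjF adjD u) →
    ∀ (visc : PySem.Set Int),
      u ∈ visc → (∀ x ∈ visc, x ∈ vis ∨ (x ∈ SS ∧ x ≠ t)) →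
      SS.card + 1 ≤ fb + visc.toFinset.card →
      ((pvAugGo rec u ns (false, rD, visc)).1 = true →
        ∃ L : List Int, L.head? = some t ∧ L.getLast? = some u ∧ L.Nodup ∧
          (∀ x ∈ L, x = t ∨ x = u ∨ (x ∈ SS ∧ x ∉ visc)) ∧
          (∀ e ∈ L.zip L.tail, 0 < pvFun rD (e.2, e.1) ∧ e.1 ∈ pvAdjF adjD e.2) ∧
          pvFun (pvAugGo rec u ns (false, rD, visc)).2.1 = pvApplyC L (pvFun rD)) ∧
      ((pvAugGo rec u ns (false, rD, visc)).1 = false →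
        (pvAugGo rec u ns (false, rD, visc)).2.1 = rD ∧
        (∀ x ∈ visc, x ∈ (pvAugGo rec u ns (false, rD, visc)).2.2) ∧
        (∀ x ∈ (pvAugGo rec u ns (false, rD, visc)).2.2, x ∈ visc ∨ (x ∈ SS ∧ x ≠ t)) ∧
        (∀ w ∈ (pvAugGo rec u ns (false, rD, visc)).2.2, w ∉ visc →
          ∀ v ∈ pvAdjF adjD w, 0 < pvFun rD (w, v) → v ∈ (pvAugGo rec u ns (false, rD, visc)).2.2) ∧
        (∀ v ∈ ns, 0 < pvFun rD (u, v) → v ∈ (pvAugGo rec u ns (false, rD, visc)).2.2)) := by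
  intro ns
  induction ns with
  | nil =>
    intro _ visc huv hvc hbud
    refine ⟨fun h => absurd h (by simp [pvAugGo]), fun _ => ?_⟩
    exact ⟨rfl, fun x hx => hx, fun x hx => Or.inl hx, fun w hw hwn => absurd hw hwn, by simp⟩
  | cons v vs ih =>
    intro hns visc huv hvc hbud
    have htvc : t ∉ visc := by
      intro hmem
      rcases hvc t hmem with h | h
      · exact htv h
      · exact h.2 rfl
    have hvcSS : ∀ x ∈ visc, x ∈ SS := by
      intro x hx
      rcases hvc x hx with h | h
      · exact hvSS x h
      · exact h.1
    show _ ∧ _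
    rw [show pvAugGo rec u (v :: vs) (false, rD, visc) =
        (if ¬ (false : Bool) ∧ ¬ PySem.Set.contains visc v ∧ 0 < rD.getD (u, v) 0 then
          let res := rec v rD visc
          if res.1 then
            let r1 := res.2.1.insert (u, v) (res.2.1.getD (u, v) 0 - 1)
            pvAugGo rec u vs (true, r1.insert (v, u) (r1.getD (v, u) 0 + 1), res.2.2)
          else pvAugGo rec u vs (false, res.2.1, res.2.2)
        else pvAugGo rec u vs (false, rD, visc)) from rfl]
    by_cases hc : ¬ (false : Bool) ∧ ¬ PySem.Set.contains visc v ∧ 0 < rD.getD (u, v) 0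
    · rw [if_pos hc]
      have hvnc : v ∉ visc := by
        have := hc.2.1
        rwa [PySem.Set.contains_iff] at this
      have hvSS' : v = t ∨ v ∈ SS := Or.inr (hadj u v (hns v List.mem_cons_self)).2
      have hpost := hrec v visc hvSS' hvnc htvc hvcSS hbud
      by_cases hfound : (rec v rD visc).1 = true
      · rw [if_pos hfound]
        obtain ⟨Lv, hh, hlast, hnd, hmemL, hzip, hres⟩ := hpost.1 hfound
        have hLne : Lv ≠ [] := by
          intro h; rw [h] at hh; simp at hh
        have hstop := pvAugGo_of_found rec u vs
          (true, ((rec v rD visc).2.1.insert (u, v) ((rec v rD visc).2.1.getD (u, v) 0 - 1)).insert (v, u)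
            ((((rec v rD visc).2.1.insert (u, v) ((rec v rD visc).2.1.getD (u, v) 0 - 1))).getD (v, u) 0 + 1),
            (rec v rD visc).2.2) rfl
        rw [hstop]
        have huL : u ∉ Lv := by
          intro hmem
          rcases hmemL u hmem with h | h
          · exact hut h
          · exact h.2 huv
        constructor
        · intro _
          refine ⟨Lv ++ [u], ?_, ?_, ?_, ?_, ?_, ?_⟩
          · cases Lv with
            | nil => exact absurd rfl hLne
            | cons a l => simpa using hh
          · simp
          · rw [List.nodup_append]
            exact ⟨hnd, by simp, by intro a ha b hb; rw [List.mem_singleton.1 hb]; exact fun e => huL (e ▸ ha)⟩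
          · intro x hx
            rcases List.mem_append.1 hx with hx' | hx'
            · rcases hmemL x hx' with h | h
              · exact Or.inl h
              · exact Or.inr (Or.inr h)
            · exact Or.inr (Or.inl (List.mem_singleton.1 hx'))
          · intro e he
            rw [pvZip_append_one Lv v u hlast] at he
            rcases List.mem_append.1 he with he' | he'
            · exact hzip e he'
            · rw [List.mem_singleton.1 he']
              exact ⟨hc.2.2, hns v List.mem_cons_self⟩
          · show pvFun (((rec v rD visc).2.1.insert (u, v) _).insert (v, u) _) = _
            rw [pvFun_step (rec v rD visc).2.1 u v, hres,
              pvApplyC_append_one Lv v u hlast (pvFun rD)]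
        · intro hcontra
          simp at hcontra
      · rw [if_neg hfound]
        rw [Bool.not_eq_true] at hfound
        obtain ⟨hreq, hsub1, hvin, hsub2, hclo⟩ := hpost.2 hfound
        rw [hreq]
        set vis1 := (rec v rD visc).2.2 with hv1
        have hvc1 : ∀ x ∈ vis1, x ∈ vis ∨ (x ∈ SS ∧ x ≠ t) := by
          intro x hx
          rcases hsub2 x hx with h | h
          · exact hvc x h
          · exact Or.inr h
        have hbud1 : SS.card + 1 ≤ fb + vis1.toFinset.card := by
          have hsubF : visc.toFinset ⊆ vis1.toFinset := by
            intro x hx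
            exact List.mem_toFinset.2 (hsub1 x (List.mem_toFinset.1 hx))
          have := Finset.card_le_card hsubF
          omega
        obtain ⟨ihT, ihF⟩ := ih (fun w hw => hns w (List.mem_cons_of_mem _ hw)) vis1
          (hsub1 u huv) hvc1 hbud1
        constructor
        · intro hT
          obtain ⟨L, hh, hlast, hnd, hmemL, hzip, hres⟩ := ihT hT
          refine ⟨L, hh, hlast, hnd, ?_, hzip, hres⟩
          intro x hx
          rcases hmemL x hx with h | h | h
          · exact Or.inl h
          · exact Or.inr (Or.inl h)
          · exact Or.inr (Or.inr ⟨h.1, fun hmem => h.2 (hsub1 x hmem)⟩)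
        · intro hF
          obtain ⟨h1, h2, h3, h4, h5⟩ := ihF hF
          refine ⟨h1, fun x hx => h2 x (hsub1 x hx), ?_, ?_, ?_⟩
          · intro x hx
            rcases h3 x hx with h | h
            · exact hsub2 x h
            · exact Or.inr h
          · intro w hw hwn nv hnv hpos
            by_cases hw1 : w ∈ vis1
            · exact h2 nv (hclo w hw1 hwn nv hnv hpos)
            · exact h4 w hw hw1 nv hnv hpos
          · intro w hw hpos
            rcases List.mem_cons.1 hw with rfl | hw'
            · exact h2 w hvin
            · exact h5 w hw' hpos
    · rw [if_neg hc]
      have hvold : v ∈ visc ∨ ¬ 0 < rD.getD (u, v) 0 := by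
        by_cases hmem : v ∈ visc
        · exact Or.inl hmem
        · refine Or.inr ?_
          intro hpos
          exact hc ⟨by simp, by rw [PySem.Set.contains_iff]; simpa using hmem, hpos⟩
      obtain ⟨ihT, ihF⟩ := ih (fun w hw => hns w (List.mem_cons_of_mem _ hw)) visc huv hvc hbud
      refine ⟨ihT, ?_⟩
      intro hF
      obtain ⟨h1, h2, h3, h4, h5⟩ := ihF hF
      refine ⟨h1, h2, h3, h4, ?_⟩
      intro w hw hpos
      rcases List.mem_cons.1 hw with rfl | hw'
      · rcases hvold with h | h
        · exact h2 w h
        · exact absurd hpos h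
      · exact h5 w hw' hpos

-- specification of Source B's _augment
lemma pvAug_spec (adjD : PySem.Dict Int (List Int)) (SS : Finset Int) (t : Int)
    (hadj : ∀ a b, b ∈ pvAdjF adjD a → a ∈ SS ∧ b ∈ SS) :
    ∀ (fuel : Nat) (u : Int) (rD : PySem.Dict (Int × Int) Int) (vis : PySem.Set Int),
      (u = t ∨ u ∈ SS) → u ∉ vis → t ∉ vis → (∀ x ∈ vis, x ∈ SS) →
      SS.card + 1 ≤ fuel + vis.toFinset.card →
      pvAugPost adjD SS t u rD vis (pvAug adjD t fuel u rD vis) := by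
  intro fuel
  induction fuel with
  | zero =>
    intro u rD vis _ _ _ hvSS hbud
    exfalso
    have hsub : vis.toFinset ⊆ SS := by
      intro x hx
      exact hvSS x (List.mem_toFinset.1 hx)
    have := Finset.card_le_card hsub
    omega
  | succ fuel ih =>
    intro u rD vis hu hunv htv hvSS hbud
    show pvAugPost adjD SS t u rD vis
      (if u = t then (true, rD, vis)
       else pvAugGo (pvAug adjD t fuel) u (adjD.getD u []) (false, rD, PySem.Set.add vis u))
    by_cases hut : u = t
    · rw [if_pos hut]
      constructor
      · intro _
        refine ⟨[u], by simp [hut], by simp, by simp, by simp [hut], by simp, ?_⟩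
        simp [pvApplyC]
      · intro h; simp at h
    · rw [if_neg hut]
      have huSS : u ∈ SS := by
        rcases hu with h | h
        · exact absurd h hut
        · exact h
      have hmemadd : ∀ x, x ∈ PySem.Set.add vis u ↔ x ∈ vis ∨ x = u := by
        intro x; exact PySem.Set.mem_add _ _ _
      have hrec : ∀ (v : Int) (visc : PySem.Set Int),
          (v = t ∨ v ∈ SS) → v ∉ visc → t ∉ visc → (∀ x ∈ visc, x ∈ SS) →
          SS.card + 1 ≤ fuel + visc.toFinset.card →
          pvAugPost adjD SS t v rD visc (pvAug adjD t fuel v rD visc) := by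
        intro v visc h1 h2 h3 h4 h5
        exact ih v rD visc h1 h2 h3 h4 h5
      have hbud' : SS.card + 1 ≤ fuel + (PySem.Set.add vis u).toFinset.card := by
        have hsubF : insert u vis.toFinset ⊆ (PySem.Set.add vis u).toFinset := by
          intro x hx
          rcases Finset.mem_insert.1 hx with rfl | hx'
          · exact List.mem_toFinset.2 ((PySem.Set.mem_add _ _ _).2 (Or.inr rfl))
          · exact List.mem_toFinset.2 ((PySem.Set.mem_add _ _ _).2
              (Or.inl (List.mem_toFinset.1 hx')))
        have hle := Finset.card_le_card hsubF
        rw [Finset.card_insert_of_notMem (fun h => hunv (List.mem_toFinset.1 h))] at hle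
        omega
      obtain ⟨goT, goF⟩ := pvAugGo_spec adjD SS t u rD vis fuel (pvAug adjD t fuel)
        hadj huSS hut htv hvSS hrec (adjD.getD u []) (fun _ h => h)
        (PySem.Set.add vis u) ((hmemadd u).2 (Or.inr rfl))
        (by
          intro x hx
          rcases (hmemadd x).1 hx with h | rfl
          · exact Or.inl h
          · exact Or.inr ⟨huSS, hut⟩)
        hbud'
      constructor
      · intro hT
        obtain ⟨L, hh, hlast, hnd, hmemL, hzip, hres⟩ := goT hT
        refine ⟨L, hh, hlast, hnd, ?_, hzip, hres⟩
        intro x hx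
        rcases hmemL x hx with h | rfl | h
        · exact Or.inl h
        · exact Or.inr ⟨huSS, hunv⟩
        · exact Or.inr ⟨h.1, fun hmem => h.2 ((hmemadd x).2 (Or.inl hmem))⟩
      · intro hF
        obtain ⟨h1, h2, h3, h4, h5⟩ := goF hF
        refine ⟨h1, ?_, h2 u ((hmemadd u).2 (Or.inr rfl)), ?_, ?_⟩
        · intro x hx
          exact h2 x ((hmemadd x).2 (Or.inl hx))
        · intro x hx
          rcases h3 x hx with h | h
          · rcases (hmemadd x).1 h with h' | rfl
            · exact Or.inl h'
            · exact Or.inr ⟨huSS, hut⟩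
          · exact Or.inr h
        · intro w hw hwn nv hnv hpos
          by_cases hwadd : w ∈ PySem.Set.add vis u
          · rcases (hmemadd w).1 hwadd with h | rfl
            · exact absurd h hwn
            · exact h5 nv hnv hpos
          · exact h4 w hw hwadd nv hnv hpos

-- flow-loop specification, port B (same statement as A's, via the DFS augmenter)
lemma pvCapped_spec (adjD : PySem.Dict Int (List Int)) (SS : Finset Int) (bnd : Nat)
    (s t : Int) (hadjOK : pvAdjOK SS (pvAdjF adjD)) (hsSS : s ∈ SS) (htSS : t ∈ SS)
    (hst : s ≠ t) (hbnd : SS.card + 1 ≤ bnd) :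
    ∀ (fuel : Nat) (rD : PySem.Dict (Int × Int) Int) (flow : Int),
      pvGood (pvAdjF adjD) (pvFun rD) →
      ∃ k : Nat, pvCapped adjD bnd s t fuel rD flow = flow + k ∧
        (k = fuel ∨ ∃ R : Finset Int, s ∈ R ∧ t ∉ R ∧ (k : Int) = pvPhi SS R (pvFun rD)) ∧
        (∀ R : Finset Int, s ∈ R → t ∉ R → (k : Int) ≤ pvPhi SS R (pvFun rD)) := by
  intro fuel
  induction fuel with
  | zero =>
    intro rD flow hG
    exact ⟨0, by simp [pvCapped], Or.inl rfl,
      fun R _ _ => by simpa using pvPhi_nonneg SS R _ hG.1⟩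
  | succ fuel ih =>
    intro rD flow hG
    have hpost := pvAug_spec adjD SS t hadjOK.2 bnd s rD PySem.Set.empty
      (Or.inr hsSS) (by simp [PySem.Set.empty]) (by simp [PySem.Set.empty])
      (by simp [PySem.Set.empty]) (by simpa using hbnd)
    set res := pvAug adjD t bnd s rD PySem.Set.empty with hresd
    by_cases hfound : res.1 = true
    · have hstep : pvCapped adjD bnd s t (fuel + 1) rD flow =
          pvCapped adjD bnd s t fuel res.2.1 (flow + 1) := by
        rw [pvCapped.eq_def]
        simp only [← hresd, hfound, if_true]
      obtain ⟨L, hh, hlast, hnd, hmemL, hzip, hres⟩ := hpost.1 hfound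
      have hmemSS : ∀ x ∈ L, x ∈ SS := by
        intro x hx
        rcases hmemL x hx with rfl | h
        · exact htSS
        · exact h.1
      have hG' : pvGood (pvAdjF adjD) (pvFun res.2.1) := by
        rw [hres]
        exact pvGood_applyC _ hadjOK.1 L _ hnd hzip hG
      have hchNe : L.IsChain (· ≠ ·) := pvNodup_chain_ne L hnd
      have hphiL : ∀ R : Finset Int, s ∈ R → t ∉ R →
          pvPhi SS R (pvApplyC L (pvFun rD)) = pvPhi SS R (pvFun rD) - 1 := by
        intro R hsR htR
        rw [pvPhi_applyC SS R L t s hh hlast hmemSS hchNe (pvFun rD)]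
        unfold pvChi
        rw [if_neg htR, if_pos hsR]
        ring
      obtain ⟨k', hres', hdisj', hbound'⟩ := ih res.2.1 (flow + 1) hG'
      refine ⟨k' + 1, ?_, ?_, ?_⟩
      · rw [hstep, hres']
        push_cast
        ring
      · rcases hdisj' with hk | ⟨R, hsR, htR, hphi⟩
        · exact Or.inl (by omega)
        · refine Or.inr ⟨R, hsR, htR, ?_⟩
          rw [hres, hphiL R hsR htR] at hphi
          push_cast
          omega
      · intro R hsR htR
        have := hbound' R hsR htR
        rw [hres, hphiL R hsR htR] at this
        push_cast
        omega
    · rw [Bool.not_eq_true] at hfound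
      have hstep : pvCapped adjD bnd s t (fuel + 1) rD flow = flow := by
        rw [pvCapped.eq_def]
        simp only [← hresd, hfound, Bool.false_eq_true, if_false]
      obtain ⟨_, _, hsin, hsub2, hclo⟩ := hpost.2 hfound
      have hsR : s ∈ res.2.2.toFinset := List.mem_toFinset.2 hsin
      have htR : t ∉ res.2.2.toFinset := by
        rw [List.mem_toFinset]
        intro hmem
        rcases hsub2 t hmem with h | h
        · simp [PySem.Set.empty] at h
        · exact h.2 rfl
      have hphi0 : pvPhi SS (res.2.2.toFinset) (pvFun rD) = 0 := by
        apply Finset.sum_eq_zero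
        intro p hp
        simp only [pvCross, Finset.mem_filter] at hp
        obtain ⟨_, hpR, hpNR⟩ := hp
        by_contra hne
        have hpos : 0 < pvFun rD p := lt_of_le_of_ne (hG.1 p) (Ne.symm hne)
        have hadj' : p.2 ∈ pvAdjF adjD p.1 := hG.2 p.1 p.2 (by
          rw [show ((p.1, p.2) : Int × Int) = p from rfl]
          exact hpos)
        have : p.2 ∈ res.2.2 := hclo p.1 (List.mem_toFinset.1 hpR)
          (by simp [PySem.Set.empty]) p.2 hadj' (by
            rw [show ((p.1, p.2) : Int × Int) = p from rfl]
            exact hpos)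
        exact hpNR (List.mem_toFinset.2 this)
      refine ⟨0, by rw [hstep]; simp, Or.inr ⟨res.2.2.toFinset, hsR, htR, by rw [hphi0]; simp⟩,
        fun R _ _ => by simpa using pvPhi_nonneg SS R _ hG.1⟩

-- ---- graph-building lemmas ----

lemma pvAdjAddA_mem (d : PySem.Dict Int (List Int)) (k x k' x' : Int) :
    x' ∈ (pvAdjAddA d k x).getD k' [] ↔ x' ∈ d.getD k' [] ∨ (k' = k ∧ x' = x) := by
  unfold pvAdjAddA
  by_cases hm : x ∈ d.getD k []
  · simp only [if_pos hm]
    constructor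
    · exact Or.inl
    · rintro (h | ⟨rfl, rfl⟩)
      · exact h
      · exact hm
  · simp only [if_neg hm, PySem.Dict.getD_insert]
    by_cases hk : k' = k
    · subst hk; simp [List.mem_append]
    · simp [hk]

lemma pvAdjSet_mem (d : PySem.Dict Int (List Int)) (k x k' x' : Int) :
    x' ∈ (pvAdjSet d k x).getD k' [] ↔ x' ∈ d.getD k' [] ∨ (k' = k ∧ x' = x) := by
  unfold pvAdjSet
  by_cases hc : d.contains k = true
  · rw [PySem.Dict.setdefault_of_contains _ _ hc]
    rw [PySem.Dict.getD_insert]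
    by_cases hk : k' = k
    · subst hk
      simp [PySem.Set.mem_add]
    · simp [hk]
  · rw [Bool.not_eq_true] at hc
    rw [PySem.Dict.setdefault_of_not_contains _ _ hc]
    rw [PySem.Dict.getD_insert, PySem.Dict.getD_insert]
    by_cases hk : k' = k
    · subst hk
      simp [PySem.Set.mem_add, PySem.Dict.getD_of_not_contains _ _ hc]
    · simp [hk, PySem.Dict.getD_insert]

def pvBInv (S : List Int) (st : PySem.Dict (Int × Int) Int × PySem.Dict Int (List Int)) : Prop :=
  (∀ p, 0 ≤ pvFun st.1 p) ∧ (∀ u v, 0 < pvFun st.1 (u, v) → v ∈ pvAdjF st.2 u) ∧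
  (∀ u v, v ∈ pvAdjF st.2 u → u ∈ pvAdjF st.2 v) ∧
  (∀ u v, v ∈ pvAdjF st.2 u → u ∈ S ∧ v ∈ S)

lemma pvBInv_step (S : List Int) (st : PySem.Dict (Int × Int) Int × PySem.Dict Int (List Int))
    (u v : Int) (hI : pvBInv S st) (hu : u ∈ S) (hv : v ∈ S) :
    pvBInv S (st.1.insert (u, v) (st.1.getD (u, v) 0 + 1), pvAdjAddA (pvAdjAddA st.2 u v) v u) := by
  obtain ⟨h1, h2, h3, h4⟩ := hI
  have hmem : ∀ k' x', x' ∈ pvAdjF (pvAdjAddA (pvAdjAddA st.2 u v) v u) k' ↔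
      x' ∈ pvAdjF st.2 k' ∨ (k' = u ∧ x' = v) ∨ (k' = v ∧ x' = u) := by
    intro k' x'
    unfold pvAdjF
    rw [pvAdjAddA_mem, pvAdjAddA_mem]
    tauto
  refine ⟨?_, ?_, ?_, ?_⟩
  · intro p
    rw [pvFun_insert, Function.update_apply]
    split_ifs with h
    · have := h1 (u, v); unfold pvFun at this; omega
    · exact h1 p
  · intro a b hpos
    rw [pvFun_insert, Function.update_apply] at hpos
    rw [hmem]
    split_ifs at hpos with h
    · have hab : a = u ∧ b = v := by constructor <;> (cases h; rfl)
      exact Or.inr (Or.inl ⟨hab.1, hab.2⟩)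
    · exact Or.inl (h2 a b hpos)
  · intro a b hb
    rw [hmem] at hb
    rw [hmem]
    rcases hb with hb | ⟨rfl, rfl⟩ | ⟨rfl, rfl⟩
    · exact Or.inl (h3 a b hb)
    · exact Or.inr (Or.inr ⟨rfl, rfl⟩)
    · exact Or.inr (Or.inl ⟨rfl, rfl⟩)
  · intro a b hb
    rw [hmem] at hb
    rcases hb with hb | ⟨rfl, rfl⟩ | ⟨rfl, rfl⟩
    · exact h4 a b hb
    · exact ⟨hu, hv⟩
    · exact ⟨hv, hu⟩

lemma pvBInv_stepB (S : List Int) (st : PySem.Dict (Int × Int) Int × PySem.Dict Int (List Int))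
    (u v : Int) (hI : pvBInv S st) (hu : u ∈ S) (hv : v ∈ S) :
    pvBInv S (st.1.insert (u, v) (st.1.getD (u, v) 0 + 1), pvAdjSet (pvAdjSet st.2 u v) v u) := by
  obtain ⟨h1, h2, h3, h4⟩ := hI
  have hmem : ∀ k' x', x' ∈ pvAdjF (pvAdjSet (pvAdjSet st.2 u v) v u) k' ↔
      x' ∈ pvAdjF st.2 k' ∨ (k' = u ∧ x' = v) ∨ (k' = v ∧ x' = u) := by
    intro k' x'
    unfold pvAdjF
    rw [pvAdjSet_mem, pvAdjSet_mem]
    tauto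
  refine ⟨?_, ?_, ?_, ?_⟩
  · intro p
    rw [pvFun_insert, Function.update_apply]
    split_ifs with h
    · have := h1 (u, v); unfold pvFun at this; omega
    · exact h1 p
  · intro a b hpos
    rw [pvFun_insert, Function.update_apply] at hpos
    rw [hmem]
    split_ifs at hpos with h
    · have hab : a = u ∧ b = v := by constructor <;> (cases h; rfl)
      exact Or.inr (Or.inl ⟨hab.1, hab.2⟩)
    · exact Or.inl (h2 a b hpos)
  · intro a b hb
    rw [hmem] at hb
    rw [hmem]
    rcases hb with hb | ⟨rfl, rfl⟩ | ⟨rfl, rfl⟩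
    · exact Or.inl (h3 a b hb)
    · exact Or.inr (Or.inr ⟨rfl, rfl⟩)
    · exact Or.inr (Or.inl ⟨rfl, rfl⟩)
  · intro a b hb
    rw [hmem] at hb
    rcases hb with hb | ⟨rfl, rfl⟩ | ⟨rfl, rfl⟩
    · exact h4 a b hb
    · exact ⟨hu, hv⟩
    · exact ⟨hv, hu⟩

lemma pvBInv_empty (S : List Int) : pvBInv S (PySem.Dict.empty, PySem.Dict.empty) := by
  refine ⟨?_, ?_, ?_, ?_⟩
  · intro p; show (0 : Int) ≤ PySem.Dict.empty.getD p 0; rw [PySem.Dict.getD_empty]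
  · intro u v h; rw [show pvFun PySem.Dict.empty (u, v) = 0 from PySem.Dict.getD_empty ..] at h; omega
  · intro u v h; rw [show pvAdjF PySem.Dict.empty u = [] from PySem.Dict.getD_empty ..] at h; simp at h
  · intro u v h; rw [show pvAdjF PySem.Dict.empty u = [] from PySem.Dict.getD_empty ..] at h; simp at h

-- A's built graph satisfies the residual and adjacency invariants, confined to S
lemma pvBuildA_spec (S : List Int) (und : PySem.Dict Int (List Int)) :
    pvBInv S (pvBuildA S und) := by
  have inner : ∀ (u : Int), u ∈ S → ∀ (ns : List Int)
      (st : PySem.Dict (Int × Int) Int × PySem.Dict Int (List Int)), pvBInv S st →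
      pvBInv S (ns.foldl (fun st v =>
        if PySem.Set.contains S v then
          (st.1.insert (u, v) (st.1.getD (u, v) 0 + 1), pvAdjAddA (pvAdjAddA st.2 u v) v u)
        else st) st) := by
    intro u hu ns
    induction ns with
    | nil => intro st h; exact h
    | cons v vs ih =>
      intro st h
      rw [List.foldl_cons]
      by_cases hc : PySem.Set.contains S v = true
      · rw [if_pos hc]
        exact ih _ (pvBInv_step S st u v h hu ((PySem.Set.contains_iff _ _).1 hc))
      · rw [if_neg (by simpa using hc)]
        exact ih _ h
  have main : ∀ (l : List Int) (st : PySem.Dict (Int × Int) Int × PySem.Dict Int (List Int)),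
      (∀ x ∈ l, x ∈ S) → pvBInv S st →
      pvBInv S (l.foldl (fun st u =>
        (und.getD u []).foldl (fun st v =>
          if PySem.Set.contains S v then
            (st.1.insert (u, v) (st.1.getD (u, v) 0 + 1), pvAdjAddA (pvAdjAddA st.2 u v) v u)
          else st) st) st) := by
    intro l
    induction l with
    | nil => intro st _ h; exact h
    | cons x xs ih =>
      intro st hl h
      rw [List.foldl_cons]
      exact ih _ (fun y hy => hl y (List.mem_cons_of_mem _ hy))
        (inner x (hl x List.mem_cons_self) (und.getD x []) st h)
  exact main S (PySem.Dict.empty, PySem.Dict.empty) (fun _ h => h) (pvBInv_empty S)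

-- B's built graph satisfies the same invariants
lemma pvBuildB_spec (S : List Int) (und : PySem.Dict Int (List Int)) :
    pvBInv S (pvBuildB S und) := by
  have inner : ∀ (u : Int), u ∈ S → ∀ (ns : List Int)
      (st : PySem.Dict (Int × Int) Int × PySem.Dict Int (List Int)), pvBInv S st →
      pvBInv S (ns.foldl (fun st v =>
        if PySem.Set.contains S v then
          (st.1.insert (u, v) (st.1.getD (u, v) 0 + 1), pvAdjSet (pvAdjSet st.2 u v) v u)
        else st) st) := by
    intro u hu ns
    induction ns with
    | nil => intro st h; exact h
    | cons v vs ih =>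
      intro st h
      rw [List.foldl_cons]
      by_cases hc : PySem.Set.contains S v = true
      · rw [if_pos hc]
        exact ih _ (pvBInv_stepB S st u v h hu ((PySem.Set.contains_iff _ _).1 hc))
      · rw [if_neg (by simpa using hc)]
        exact ih _ h
  have main : ∀ (l : List Int) (st : PySem.Dict (Int × Int) Int × PySem.Dict Int (List Int)),
      (∀ x ∈ l, x ∈ S) → pvBInv S st →
      pvBInv S (l.foldl (fun st u =>
        (und.getD u []).foldl (fun st v =>
          if PySem.Set.contains S v then
            (st.1.insert (u, v) (st.1.getD (u, v) 0 + 1), pvAdjSet (pvAdjSet st.2 u v) v u)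
          else st) st) st) := by
    intro l
    induction l with
    | nil => intro st _ h; exact h
    | cons x xs ih =>
      intro st hl h
      rw [List.foldl_cons]
      exact ih _ (fun y hy => hl y (List.mem_cons_of_mem _ hy))
        (inner x (hl x List.mem_cons_self) (und.getD x []) st h)
  exact main S (PySem.Dict.empty, PySem.Dict.empty) (fun _ h => h) (pvBInv_empty S)

-- the two builds compute identical capacity dictionaries (the adjacency updaters never
-- touch the first component)
lemma pvBuild_cap_eq (S : List Int) (und : PySem.Dict Int (List Int)) :
    (pvBuildB S und).1 = (pvBuildA S und).1 := by
  have inner : ∀ (u : Int) (l : List Int)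
      (stA stB : PySem.Dict (Int × Int) Int × PySem.Dict Int (List Int)), stB.1 = stA.1 →
      (l.foldl (fun st v =>
        if PySem.Set.contains S v then
          (st.1.insert (u, v) (st.1.getD (u, v) 0 + 1), pvAdjSet (pvAdjSet st.2 u v) v u)
        else st) stB).1
      = (l.foldl (fun st v =>
        if PySem.Set.contains S v then
          (st.1.insert (u, v) (st.1.getD (u, v) 0 + 1), pvAdjAddA (pvAdjAddA st.2 u v) v u)
        else st) stA).1 := by
    intro u l
    induction l with
    | nil => intro stA stB h; exact h
    | cons v vs ih =>
      intro stA stB h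
      simp only [List.foldl_cons]
      by_cases hc : PySem.Set.contains S v = true
      · rw [if_pos hc, if_pos hc]
        exact ih _ _ (by rw [h])
      · rw [if_neg (by simpa using hc), if_neg (by simpa using hc)]
        exact ih _ _ h
  have main : ∀ (l : List Int)
      (stA stB : PySem.Dict (Int × Int) Int × PySem.Dict Int (List Int)), stB.1 = stA.1 →
      (l.foldl (fun st u =>
        (und.getD u []).foldl (fun st v =>
          if PySem.Set.contains S v then
            (st.1.insert (u, v) (st.1.getD (u, v) 0 + 1), pvAdjSet (pvAdjSet st.2 u v) v u)
          else st) st) stB).1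
      = (l.foldl (fun st u =>
        (und.getD u []).foldl (fun st v =>
          if PySem.Set.contains S v then
            (st.1.insert (u, v) (st.1.getD (u, v) 0 + 1), pvAdjAddA (pvAdjAddA st.2 u v) v u)
          else st) st) stA).1 := by
    intro l
    induction l with
    | nil => intro stA stB h; exact h
    | cons x xs ih =>
      intro stA stB h
      simp only [List.foldl_cons]
      exact ih _ _ (inner x (und.getD x []) stA stB h)
  exact main S (PySem.Dict.empty, PySem.Dict.empty) (PySem.Dict.empty, PySem.Dict.empty) rfl

-- ===== VERDICT (by name: the statement is the Claim_ definition above) =====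
theorem edge_connectivity_at_least_spec : Claim_equal_edge_connectivity_at_least := by
  unfold Claim_equal_edge_connectivity_at_least Spec_edge_connectivity_at_least
  intro nodes und kappa _
  unfold edge_connectivity_at_least edge_connectivity_at_least_alt
  by_cases hk : kappa ≤ 0
  · simp only [if_pos hk]
  · simp only [if_neg hk]
    by_cases hlen : PySem.Set.len (PySem.Set.ofList nodes) ≤ 1
    · simp only [if_pos hlen]
    · simp only [if_neg hlen]
      set S := PySem.Set.ofList nodes with hS
      set gA := pvBuildA S (PySem.Dict.mk und) with hgA
      set gB := pvBuildB S (PySem.Dict.mk und) with hgB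
      set s0 := (PySem.List.min? S (fun x => x)).getD 0 with hs0def
      set bnd := S.length + 2 with hbnd0
      have hSnd : S.Nodup := PySem.Set.nodup_ofList nodes
      have hcard : S.toFinset.card = S.length := List.toFinset_card_of_nodup hSnd
      obtain ⟨hcA1, hcA2, hcA3, hcA4⟩ := pvBuildA_spec S (PySem.Dict.mk und)
      obtain ⟨hcB1, hcB2, hcB3, hcB4⟩ := pvBuildB_spec S (PySem.Dict.mk und)
      have hcap : pvFun gB.1 = pvFun gA.1 := by
        rw [hgB, hgA, pvBuild_cap_eq]
      have hadjOKA : pvAdjOK S.toFinset (pvAdjF gA.2) :=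
        ⟨hcA3, fun u v hv => ⟨List.mem_toFinset.2 (hcA4 u v hv).1, List.mem_toFinset.2 (hcA4 u v hv).2⟩⟩
      have hadjOKB : pvAdjOK S.toFinset (pvAdjF gB.2) :=
        ⟨hcB3, fun u v hv => ⟨List.mem_toFinset.2 (hcB4 u v hv).1, List.mem_toFinset.2 (hcB4 u v hv).2⟩⟩
      have hGoodA : pvGood (pvAdjF gA.2) (pvFun gA.1) := ⟨hcA1, hcA2⟩
      have hGoodB : pvGood (pvAdjF gB.2) (pvFun gB.1) := ⟨hcB1, hcB2⟩
      have hbnd : S.toFinset.card + 1 ≤ bnd := by omega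
      have hcast : ((kappa.toNat : Nat) : Int) = kappa := Int.toNat_of_nonneg (by omega)
      -- s0 is a member of S
      have hS2 : 2 ≤ S.length := by
        by_contra hfalse
        exact hlen (by simp [PySem.Set.len]; omega)
      have hs0 : s0 ∈ S := by
        cases hmin : PySem.List.min? S (fun x => x) with
        | none =>
          exfalso
          have := (PySem.List.min?_eq_none_iff _ _).1 hmin
          rw [this] at hS2
          simp at hS2
        | some m =>
          rw [hs0def, hmin]
          exact PySem.List.min?_mem hmin
      -- characterisations of the two capped flows
      have lowA : ∀ s t : Int, s ≠ t → pvFlowA gA.2 bnd s t kappa.toNat gA.1 0 < kappa →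
          ∃ R : Finset Int, s ∈ R ∧ t ∉ R ∧ pvPhi S.toFinset R (pvFun gA.1) < kappa := by
        intro s t hst hlt
        obtain ⟨k, hres, hdisj, _⟩ :=
          pvFlowA_spec gA.2 S.toFinset bnd s t hadjOKA hst hbnd kappa.toNat gA.1 0 hGoodA
        rw [hres] at hlt
        rcases hdisj with hkk | ⟨R, hsR, htR, hphi⟩
        · exfalso; rw [hkk, hcast] at hlt; omega
        · exact ⟨R, hsR, htR, by rw [← hphi]; omega⟩
      have upA : ∀ s t : Int, s ≠ t → ∀ R : Finset Int, s ∈ R → t ∉ R →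
          pvPhi S.toFinset R (pvFun gA.1) < kappa →
          pvFlowA gA.2 bnd s t kappa.toNat gA.1 0 < kappa := by
        intro s t hst R hsR htR hphi
        obtain ⟨k, hres, _, hbound⟩ :=
          pvFlowA_spec gA.2 S.toFinset bnd s t hadjOKA hst hbnd kappa.toNat gA.1 0 hGoodA
        have := hbound R hsR htR
        rw [hres]
        omega
      have lowB : ∀ s t : Int, s ∈ S → t ∈ S → s ≠ t →
          pvCapped gB.2 bnd s t kappa.toNat gB.1 0 < kappa →
          ∃ R : Finset Int, s ∈ R ∧ t ∉ R ∧ pvPhi S.toFinset R (pvFun gA.1) < kappa := by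
        intro s t hsS htS hst hlt
        obtain ⟨k, hres, hdisj, _⟩ :=
          pvCapped_spec gB.2 S.toFinset bnd s t hadjOKB (List.mem_toFinset.2 hsS)
            (List.mem_toFinset.2 htS) hst hbnd kappa.toNat gB.1 0 hGoodB
        rw [hres] at hlt
        rcases hdisj with hkk | ⟨R, hsR, htR, hphi⟩
        · exfalso; rw [hkk, hcast] at hlt; omega
        · refine ⟨R, hsR, htR, ?_⟩
          rw [← hcap, ← hphi]
          omega
      have upB : ∀ s t : Int, s ∈ S → t ∈ S → s ≠ t → ∀ R : Finset Int, s ∈ R → t ∉ R →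
          pvPhi S.toFinset R (pvFun gA.1) < kappa →
          pvCapped gB.2 bnd s t kappa.toNat gB.1 0 < kappa := by
        intro s t hsS htS hst R hsR htR hphi
        obtain ⟨k, hres, _, hbound⟩ :=
          pvCapped_spec gB.2 S.toFinset bnd s t hadjOKB (List.mem_toFinset.2 hsS)
            (List.mem_toFinset.2 htS) hst hbnd kappa.toNat gB.1 0 hGoodB
        have := hbound R hsR htR
        rw [hcap] at this
        rw [hres]
        omega
      -- the mathematical core: all-pairs vs fixed-source
      have main : (∀ s ∈ S, ∀ t ∈ S, s ≠ t → ¬(pvFlowA gA.2 bnd s t kappa.toNat gA.1 0 < kappa)) ↔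
          (∀ t ∈ S, t ≠ s0 →
            ¬(pvCapped gB.2 bnd s0 t kappa.toNat gB.1 0 < kappa) ∧
            ¬(pvCapped gB.2 bnd t s0 kappa.toNat gB.1 0 < kappa)) := by
        constructor
        · intro hA t ht hts
          constructor
          · intro hlt
            obtain ⟨R, hsR, htR, hphi⟩ := lowB s0 t hs0 ht (Ne.symm hts) hlt
            exact hA s0 hs0 t ht (Ne.symm hts) (upA s0 t (Ne.symm hts) R hsR htR hphi)
          · intro hlt
            obtain ⟨R, hsR, htR, hphi⟩ := lowB t s0 ht hs0 hts hlt
            exact hA t ht s0 hs0 hts (upA t s0 hts R hsR htR hphi)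
        · intro hB s hs t ht hst hFa
          obtain ⟨R, hsR, htR, hphi⟩ := lowA s t hst hFa
          by_cases hs0R : s0 ∈ R
          · have hts0 : t ≠ s0 := fun h => htR (h ▸ hs0R)
            exact (hB t ht hts0).1 (upB s0 t hs0 ht (Ne.symm hts0) R hs0R htR hphi)
          · have hss0 : s ≠ s0 := fun h => hs0R (h ▸ hsR)
            exact (hB s hs hss0).2 (upB s s0 hs hs0 hss0 R hsR hs0R hphi)
      -- Bool-level characterisations of the two `all` loops
      have charA : (S.all fun source => S.all fun target =>
            if source == target then true
            else if pvFlowA gA.2 bnd source target kappa.toNat gA.1 0 < kappa then false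
            else true) = true ↔
          (∀ s ∈ S, ∀ t ∈ S, s ≠ t → ¬(pvFlowA gA.2 bnd s t kappa.toNat gA.1 0 < kappa)) := by
        simp only [List.all_eq_true]
        constructor
        · intro h s hs t ht hst hlt
          have := h s hs t ht
          rw [if_neg (by simpa using hst), if_pos hlt] at this
          exact absurd this (by simp)
        · intro h s hs t ht
          by_cases hst : s = t
          · rw [if_pos (by simpa using hst)]
          · rw [if_neg (by simpa using hst), if_neg (h s hs t ht hst)]
      have charB : (S.all fun target =>
            if target == s0 then true
            else if pvCapped gB.2 bnd s0 target kappa.toNat gB.1 0 < kappa then false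
            else if pvCapped gB.2 bnd target s0 kappa.toNat gB.1 0 < kappa then false
            else true) = true ↔
          (∀ t ∈ S, t ≠ s0 →
            ¬(pvCapped gB.2 bnd s0 t kappa.toNat gB.1 0 < kappa) ∧
            ¬(pvCapped gB.2 bnd t s0 kappa.toNat gB.1 0 < kappa)) := by
        simp only [List.all_eq_true]
        constructor
        · intro h t ht hts
          have := h t ht
          rw [if_neg (by simpa using hts)] at this
          constructor
          · intro hlt
            rw [if_pos hlt] at this
            exact absurd this (by simp)
          · intro hlt
            by_cases h1 : pvCapped gB.2 bnd s0 t kappa.toNat gB.1 0 < kappa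
            · rw [if_pos h1] at this
              exact absurd this (by simp)
            · rw [if_neg h1, if_pos hlt] at this
              exact absurd this (by simp)
        · intro h t ht
          by_cases hts : t = s0
          · rw [if_pos (by simpa using hts)]
          · rw [if_neg (by simpa using hts), if_neg (h t ht hts).1, if_neg (h t ht hts).2]
      rw [Bool.eq_iff_iff, charA, charB]
      exact main
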